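-- pv_equiv track=rewrite | github.com/jcrozum/PyStableMotifs | StableMotifs/DomainOfInfluence.py | logical_domain_of_influence
-- ===== SOURCE A (Python) =====
-- def fixed_implies_implicant(fixed,implicant):
--     """
--     Returns True iff the partial state "fixed" implies the implicant
--     """
--     rval = True
--     for k,v in implicant.items():
--         if not k in fixed:
--             rval = False
--             break
--         elif fixed[k] != v:
--             rval = False
--             break
--     return rval
--
-- def logical_domain_of_influence(state,primes):
--     """
--     Computes the logical domain of influence (LDOI) (see Yang et al. 2018)
--
--     Inputs:
--     state - a dict in the PyBoolNet implicant form that define fixed nodes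
--     primes - a PyBoolNet primes dictionary that define the update rules
--
--     Outputs:
--     implied - node states in the LDOI of state
--     contradicted - node states that are implied by a subset of the LDOI,
--                    but contradict the node states specified by state
--     Note: implied and contradicted are dictionaries in the same format as state.
--     """
--     fixed = state.copy()
--     implied = {}
--     contradicted = {}
--     primes_to_search = primes.copy()
--
--     while True:
--         states_added = False
--         deletion_list = []
--         for k,v in primes_to_search.items():
--             for i in [0,1]:
--                 for p in v[i]:
--                     if fixed_implies_implicant(fixed,p):
--                         deletion_list.append(k)
--                         states_added = True
--                         if k in fixed:
--                             if fixed[k] == i: implied[k] = i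
--                             else: contradicted[k] = i
--                         else:
--                             implied[k] = i
--                             fixed[k] = i
--         for k in set(deletion_list): del primes_to_search[k]
--         if not states_added or len(primes_to_search) == 0: break
--     return implied, contradicted
-- ===== SOURCE B (Python) =====
-- def logical_domain_of_influence(state, primes):
--     fixed = dict(state)
--     implied = {}
--     contradicted = {}
--
--     # Index phase: flatten every implicant once, recording per-implicant
--     # counters (unfixed literals), death flags (literal contradicting fixed),
--     # a per-(node, value) count of currently satisfied live implicants, and
--     # an occurrence index literal-node -> implicants that mention it.
--     names = []      # implicant id -> target node
--     sides = []      # implicant id -> 0/1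
--     remaining = []  # implicant id -> number of literals not yet fixed
--     dead = []       # implicant id -> some literal contradicts fixed
--     sat = {}        # (node, i) -> count of live fully-satisfied implicants
--     occ = {}        # literal node -> list of (implicant id, required value)
--
--     for name, rules in primes.items():
--         for i in (0, 1):
--             sat[(name, i)] = 0
--             for p in rules[i]:
--                 j = len(names)
--                 names.append(name)
--                 sides.append(i)
--                 rem = 0
--                 dd = False
--                 for k, v in p.items():
--                     if k in fixed:
--                         if fixed[k] != v:
--                             dd = True
--                     else:
--                         rem += 1
--                         occ.setdefault(k, []).append((j, v))
--                 remaining.append(rem)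
--                 dead.append(dd)
--                 if rem == 0 and not dd:
--                     sat[(name, i)] += 1
--
--     def fix(k, x):
--         # k becomes fixed at x: push the news through the occurrence index.
--         fixed[k] = x
--         for j, v in occ.get(k, ()):
--             if dead[j]:
--                 continue
--             if v == x:
--                 remaining[j] -= 1
--                 if remaining[j] == 0:
--                     sat[(names[j], sides[j])] += 1
--             else:
--                 dead[j] = True
--
--     pending = list(primes)
--     while True:
--         progress = False
--         still = []
--         for name in pending:
--             hit = False
--             for i in (0, 1):
--                 if sat[(name, i)] > 0:
--                     hit = True
--                     if name in fixed:
--                         if fixed[name] == i: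
--                             implied[name] = i
--                         else:
--                             contradicted[name] = i
--                     else:
--                         implied[name] = i
--                         fix(name, i)
--             if hit:
--                 progress = True
--             else:
--                 still.append(name)
--         pending = still
--         if not progress or not pending:
--             break
--     return implied, contradicted
-- ===== Notes on version B (the rewrite author's own statement) =====
-- stated objective: alternative
-- what changed: B replaces A's repeated re-evaluation of every implicant against the growing fixed dict by a one-time literal index: per-implicant unfixed-literal counters with death flags, a node->implicant occurrence index, and per-(node,value) satisfied counts that are updated incrementally when a node becomes fixed, so each pass tests a pending node in O(1) instead of rescanning its implicants' literals.
import Mathlib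
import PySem

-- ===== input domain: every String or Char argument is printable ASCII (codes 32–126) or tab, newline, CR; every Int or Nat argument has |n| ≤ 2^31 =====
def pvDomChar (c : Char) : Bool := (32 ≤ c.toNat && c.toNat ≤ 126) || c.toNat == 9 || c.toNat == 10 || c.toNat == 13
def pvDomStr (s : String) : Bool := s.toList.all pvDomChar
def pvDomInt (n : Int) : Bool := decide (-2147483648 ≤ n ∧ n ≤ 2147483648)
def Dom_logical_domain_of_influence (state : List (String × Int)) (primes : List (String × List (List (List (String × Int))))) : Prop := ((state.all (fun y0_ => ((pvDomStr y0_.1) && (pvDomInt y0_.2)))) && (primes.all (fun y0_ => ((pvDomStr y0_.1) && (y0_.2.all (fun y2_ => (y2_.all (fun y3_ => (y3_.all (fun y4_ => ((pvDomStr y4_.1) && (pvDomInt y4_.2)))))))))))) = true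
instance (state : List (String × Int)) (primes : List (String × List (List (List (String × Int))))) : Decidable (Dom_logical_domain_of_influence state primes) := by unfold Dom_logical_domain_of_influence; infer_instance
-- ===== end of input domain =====

-- B replaces A's repeated rescans of every implicant's literals by a one-time literal
-- index: per-implicant unfixed-literal counters with death flags, a node→implicant
-- occurrence index, and per-(node,value) satisfied counts updated incrementally when a
-- node becomes fixed, so each pass tests a pending node in O(1) (objective: alternative).

abbrev PvSt := PySem.Dict String Int × PySem.Dict String Int × PySem.Dict String Int
abbrev PvItem := String × List (List (List (String × Int)))

-- ===== PORT A =====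
-- fixed_implies_implicant: loop with break
def pvImplies (fixed : PySem.Dict String Int) : List (String × Int) → Bool
  | [] => true
  | kv :: rest =>
    match fixed.get? kv.1 with
    | none => false
    | some w => if w != kv.2 then false else pvImplies fixed rest

-- the body executed when an implicant fires (the fixed/implied/contradicted updates)
def pvFireA (k : String) (i : Int) (s : PvSt) : PvSt :=
  match s.1.get? k with
  | some w =>
    if w == i then (s.1, s.2.1.insert k i, s.2.2)
    else (s.1, s.2.1, s.2.2.insert k i)
  | none => (s.1.insert k i, s.2.1.insert k i, s.2.2)

-- 'for p in v[i]: …' carrying (fixed, implied, contradicted), deletion_list, states_added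
def pvScanA (k : String) (i : Int) (ps : List (List (String × Int)))
    (st : PvSt × List String × Bool) : PvSt × List String × Bool :=
  ps.foldl (fun acc p =>
    if pvImplies acc.1.1 (PySem.Dict.ofList p).items then
      (pvFireA k i acc.1, acc.2.1 ++ [k], true)
    else acc) st

-- 'for i in [0,1]: …' (v[i] with default [] totalises the IndexError Pre_ excludes)
def pvItemA (kv : PvItem) (st : PvSt × List String × Bool) : PvSt × List String × Bool :=
  ([0, 1] : List Int).foldl (fun acc i => pvScanA kv.1 i (PySem.List.pyGetD kv.2 i []) acc) st

-- 'for k,v in primes_to_search.items(): …'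
def pvRoundA (items : List PvItem) (st : PvSt × List String × Bool) : PvSt × List String × Bool :=
  items.foldl (fun acc kv => pvItemA kv acc) st

-- 'while True: …' (fuel pts.size + 1 is enough: every continuing pass deletes a key)
def pvLoopA : Nat → PySem.Dict String (List (List (List (String × Int)))) → PvSt →
    (PySem.Dict String Int) × (PySem.Dict String Int)
  | 0, _, s => (s.2.1, s.2.2)
  | n + 1, pts, s =>
    let r := pvRoundA pts.items (s, [], false)
    let pts' := (PySem.Set.ofList r.2.1).foldl (fun d k => d.erase k) pts
    if !r.2.2 || pts'.size == 0 then (r.1.2.1, r.1.2.2)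
    else pvLoopA n pts' r.1

def logical_domain_of_influence (state : List (String × Int)) (primes : List (String × List (List (List (String × Int))))) : (List (String × Int)) × (List (String × Int)) :=
  let fixed := PySem.Dict.ofList state
  let pts := PySem.Dict.ofList primes
  let r := pvLoopA (pts.size + 1) pts (fixed, PySem.Dict.empty, PySem.Dict.empty)
  (r.1.items, r.2.items)

-- ===== PORT B =====
-- the literal index built once: names/sides/remaining/dead are j-indexed lists over all
-- implicants, sat counts satisfied live implicants per (node, value), occ maps a literal
-- node to the implicants mentioning it
structure PvIdx where
  names : List String
  sides : List Int
  remaining : List Int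
  dead : List Bool
  sat : PySem.Dict (String × Int) Int
  occ : PySem.Dict String (List (Nat × Int))

abbrev PvCSt := PySem.Dict String Int × PySem.Dict String Int × PySem.Dict String Int × PvIdx

def pvIdx0 : PvIdx := ⟨[], [], [], [], PySem.Dict.empty, PySem.Dict.empty⟩

-- one literal 'for k, v in p.items(): …' of the build phase
def pvAddLit (fixed : PySem.Dict String Int) (j : Nat)
    (acc : Int × Bool × PySem.Dict String (List (Nat × Int))) (kv : String × Int) :
    Int × Bool × PySem.Dict String (List (Nat × Int)) :=
  if fixed.contains kv.1 then
    if fixed.getD kv.1 0 != kv.2 then (acc.1, true, acc.2.2) else acc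
  else (acc.1 + 1, acc.2.1, acc.2.2.insert kv.1 (acc.2.2.getD kv.1 [] ++ [(j, kv.2)]))

-- one implicant 'for p in rules[i]: …' of the build phase
def pvAddImp (fixed : PySem.Dict String Int) (name : String) (i : Int)
    (s : PvIdx) (p : List (String × Int)) : PvIdx :=
  let j := s.names.length
  let r := (PySem.Dict.ofList p).items.foldl (pvAddLit fixed j) (0, false, s.occ)
  { names := s.names ++ [name], sides := s.sides ++ [i],
    remaining := s.remaining ++ [r.1], dead := s.dead ++ [r.2.1],
    sat := if r.1 == 0 && !r.2.1 then
        s.sat.insert (name, i) (s.sat.getD (name, i) 0 + 1)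
      else s.sat,
    occ := r.2.2 }

-- one side 'sat[(name, i)] = 0; for p in rules[i]: …'
def pvAddSide (fixed : PySem.Dict String Int) (name : String)
    (rules : List (List (List (String × Int)))) (s : PvIdx) (i : Int) : PvIdx :=
  (PySem.List.pyGetD rules i []).foldl (pvAddImp fixed name i)
    { s with sat := s.sat.insert (name, i) 0 }

-- the whole index-building phase 'for name, rules in primes.items(): for i in (0,1): …'
def pvBuild (fixed : PySem.Dict String Int) (items : List PvItem) : PvIdx :=
  items.foldl (fun s kv => ([0, 1] : List Int).foldl (pvAddSide fixed kv.1 kv.2) s) pvIdx0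

-- body of fix's 'for j, v in occ.get(k, ()): …'
def pvFixStep (x : Int) (s : PvIdx) (jv : Nat × Int) : PvIdx :=
  if s.dead.getD jv.1 false then s
  else if jv.2 == x then
    let r := s.remaining.getD jv.1 0 - 1
    let s' := { s with remaining := s.remaining.set jv.1 r }
    if r == 0 then
      let key := (s'.names.getD jv.1 "", s'.sides.getD jv.1 0)
      { s' with sat := s'.sat.insert key (s'.sat.getD key 0 + 1) }
    else s'
  else { s with dead := s.dead.set jv.1 true }

-- fix(k, x): record the new fixed node and push the news through the occurrence index
def pvFixC (k : String) (x : Int) (fixed : PySem.Dict String Int) (idx : PvIdx) :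
    PySem.Dict String Int × PvIdx :=
  (fixed.insert k x, (idx.occ.getD k []).foldl (pvFixStep x) idx)

-- loop body for one pending name, one side: 'if sat[(name, i)] > 0: …'
def pvStepCBody (name : String) (acc : PvCSt × Bool) (i : Int) : PvCSt × Bool :=
  if 0 < acc.1.2.2.2.sat.getD (name, i) 0 then
    if acc.1.1.contains name then
      if acc.1.1.getD name 0 == i then
        ((acc.1.1, acc.1.2.1.insert name i, acc.1.2.2.1, acc.1.2.2.2), true)
      else ((acc.1.1, acc.1.2.1, acc.1.2.2.1.insert name i, acc.1.2.2.2), true)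
    else
      let r := pvFixC name i acc.1.1 acc.1.2.2.2
      ((r.1, acc.1.2.1.insert name i, acc.1.2.2.1, r.2), true)
  else acc

-- 'for i in (0, 1): …' for one pending name
def pvStepC (name : String) (st : PvCSt) : PvCSt × Bool :=
  ([0, 1] : List Int).foldl (pvStepCBody name) (st, false)

-- one pass 'for name in pending: …' building still / progress
def pvPassC : List String → PvCSt × List String × Bool → PvCSt × List String × Bool
  | [], acc => acc
  | name :: rest, acc =>
    let r := pvStepC name acc.1
    if r.2 then pvPassC rest (r.1, acc.2.1, true)
    else pvPassC rest (r.1, acc.2.1 ++ [name], acc.2.2)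

theorem pvPassC_len (names : List String) (st : PvCSt × List String × Bool) :
    (pvPassC names st).2.1.length ≤ st.2.1.length + names.length := by
  induction names generalizing st with
  | nil => simp [pvPassC]
  | cons nm tl ih =>
    simp only [pvPassC]
    split
    · have h := ih ((pvStepC nm st.1).1, st.2.1, true)
      simp only [List.length_cons] at h ⊢
      omega
    · have h := ih ((pvStepC nm st.1).1, st.2.1 ++ [nm], st.2.2)
      simp only [List.length_append, List.length_cons, List.length_nil] at h ⊢
      omega

theorem pvPassC_progress_lt (names : List String) (st : PvCSt × List String × Bool)
    (h0 : st.2.2 = false) (h1 : (pvPassC names st).2.2 = true) :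
    (pvPassC names st).2.1.length < st.2.1.length + names.length := by
  induction names generalizing st with
  | nil => simp only [pvPassC] at h1; rw [h1] at h0; cases h0
  | cons nm tl ih =>
    simp only [pvPassC] at h1 ⊢
    split
    · next hh =>
      rw [if_pos hh] at h1
      have h := pvPassC_len tl ((pvStepC nm st.1).1, st.2.1, true)
      simp only [List.length_cons] at h ⊢
      omega
    · next hh =>
      rw [if_neg hh] at h1
      have h := ih ((pvStepC nm st.1).1, st.2.1 ++ [nm], st.2.2) h0 h1
      simp only [List.length_append, List.length_cons, List.length_nil] at h ⊢
      omega

-- 'while True: … pending = still; if not progress or not pending: break'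
def pvLoopC (st : PvCSt) (pending : List String) :
    (PySem.Dict String Int) × (PySem.Dict String Int) :=
  let r := pvPassC pending (st, [], false)
  if h : r.2.2 = true ∧ r.2.1 ≠ [] then pvLoopC r.1 r.2.1
  else (r.1.2.1, r.1.2.2.1)
termination_by pending.length
decreasing_by
  have := pvPassC_progress_lt pending (st, [], false) rfl h.1
  simpa using this

def logical_domain_of_influence_alt (state : List (String × Int)) (primes : List (String × List (List (List (String × Int))))) : (List (String × Int)) × (List (String × Int)) :=
  let fixed := PySem.Dict.ofList state
  let pm := PySem.Dict.ofList primes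
  let idx := pvBuild fixed pm.items
  let r := pvLoopC (fixed, PySem.Dict.empty, PySem.Dict.empty, idx) pm.keys
  (r.1.items, r.2.items)

-- ===== PRECONDITION & SPEC =====
-- Pre_ excludes exactly the inputs where Python A raises IndexError: a node of the primes
-- dict whose rule list has fewer than 2 entries (A always indexes v[0] and v[1]).
def Pre_logical_domain_of_influence (state : List (String × Int)) (primes : List (String × List (List (List (String × Int))))) : Prop :=
  ∀ kv ∈ (PySem.Dict.ofList primes).items, 2 ≤ kv.2.length
instance (state : List (String × Int)) (primes : List (String × List (List (List (String × Int))))) : Decidable (Pre_logical_domain_of_influence state primes) := by unfold Pre_logical_domain_of_influence; infer_instance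

def pvWitness_logical_domain_of_influence : (List (String × Int)) × (List (String × List (List (List (String × Int))))) :=
  ([("a", 1)], [("b", [[[("a", 1)]], []])])

def Spec_logical_domain_of_influence (state : List (String × Int)) (primes : List (String × List (List (List (String × Int))))) (out : (List (String × Int)) × (List (String × Int))) : Prop := out = logical_domain_of_influence_alt state primes
instance (state : List (String × Int)) (primes : List (String × List (List (List (String × Int))))) (out : (List (String × Int)) × (List (String × Int))) : Decidable (Spec_logical_domain_of_influence state primes out) := by unfold Spec_logical_domain_of_influence; infer_instance

-- ===== CLAIM (what is proved, stated in full; the proofs are below) =====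
def Claim_equal_logical_domain_of_influence : Prop := ∀ (state : List (String × Int)) (primes : List (String × List (List (List (String × Int))))), Dom_logical_domain_of_influence state primes → Pre_logical_domain_of_influence state primes → Spec_logical_domain_of_influence state primes (logical_domain_of_influence state primes)

-- ===== LEMMAS AND PROOFS =====

-- Middle layer (proof-only): the pass/pending fixpoint over explicit implicant rescans.
-- A is proved equal to it (first half, as in the pass structure of A's while-loop), and
-- B's incremental index is proved to simulate it (second half).

def pvSettles (fixed : PySem.Dict String Int) (p : List (String × Int)) : Bool :=
  (PySem.Dict.ofList p).items.all (fun kv => fixed.get? kv.1 == some kv.2)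

def pvRecord (name : String) (i : Int) (s : PvSt) : PvSt :=
  if s.1.contains name then
    if s.1.getD name 0 == i then (s.1, s.2.1.insert name i, s.2.2)
    else (s.1, s.2.1, s.2.2.insert name i)
  else (s.1.insert name i, s.2.1.insert name i, s.2.2)

def pvStepB (it : PvItem) (s0 : PvSt) : PvSt × Bool :=
  let hit0 := (PySem.List.pyGetD it.2 0 []).any (fun p => pvSettles s0.1 p)
  let s1 := if hit0 then pvRecord it.1 0 s0 else s0
  let hit1 := (PySem.List.pyGetD it.2 1 []).any (fun p => pvSettles s1.1 p)
  let s2 := if hit1 then pvRecord it.1 1 s1 else s1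
  (s2, hit0 || hit1)

def pvPassB : List PvItem → PvSt × List PvItem × Bool → PvSt × List PvItem × Bool
  | [], acc => acc
  | it :: rest, acc =>
    let r := pvStepB it acc.1
    if r.2 then pvPassB rest (r.1, acc.2.1, true)
    else pvPassB rest (r.1, acc.2.1 ++ [it], acc.2.2)

theorem pvPassB_len (items : List PvItem) (st : PvSt × List PvItem × Bool) :
    (pvPassB items st).2.1.length ≤ st.2.1.length + items.length := by
  induction items generalizing st with
  | nil => simp [pvPassB]
  | cons it tl ih =>
    simp only [pvPassB]
    split
    · have h := ih ((pvStepB it st.1).1, st.2.1, true)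
      simp only [List.length_cons] at h ⊢
      omega
    · have h := ih ((pvStepB it st.1).1, st.2.1 ++ [it], st.2.2)
      simp only [List.length_append, List.length_cons, List.length_nil] at h ⊢
      omega

theorem pvPassB_progress_lt (items : List PvItem) (st : PvSt × List PvItem × Bool)
    (h0 : st.2.2 = false) (h1 : (pvPassB items st).2.2 = true) :
    (pvPassB items st).2.1.length < st.2.1.length + items.length := by
  induction items generalizing st with
  | nil => simp only [pvPassB] at h1; rw [h1] at h0; cases h0
  | cons it tl ih =>
    simp only [pvPassB] at h1 ⊢
    split
    · next hh =>
      rw [if_pos hh] at h1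
      have h := pvPassB_len tl ((pvStepB it st.1).1, st.2.1, true)
      simp only [List.length_cons] at h ⊢
      omega
    · next hh =>
      rw [if_neg hh] at h1
      have h := ih ((pvStepB it st.1).1, st.2.1 ++ [it], st.2.2) h0 h1
      simp only [List.length_append, List.length_cons, List.length_nil] at h ⊢
      omega

def pvSettle (s : PvSt) (pending : List PvItem) :
    (PySem.Dict String Int) × (PySem.Dict String Int) :=
  if h : pending = [] then (s.2.1, s.2.2)
  else
    let r := pvPassB pending (s, [], false)
    if hr : r.2.2 then pvSettle r.1 r.2.1
    else (r.1.2.1, r.1.2.2)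
termination_by pending.length
decreasing_by
  have := pvPassB_progress_lt pending (s, [], false) rfl hr
  simpa using this

-- ===== first half: port A equals the middle layer =====

theorem contains_ofList_eq (E : List String) (x : String) :
    List.contains (PySem.Set.ofList E) x = List.contains E x := by
  by_cases hx : x ∈ E
  · have h1 : x ∈ PySem.Set.ofList E := (PySem.Set.mem_ofList E x).mpr hx
    simp [List.contains_iff_mem, hx, h1]
  · have h1 : x ∉ PySem.Set.ofList E := fun h => hx ((PySem.Set.mem_ofList E x).mp h)
    simp [List.contains_iff_mem, hx, h1]

theorem pvFireA_eq_pvRecord (k : String) (i : Int) (s : PvSt) :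
    pvFireA k i s = pvRecord k i s := by
  unfold pvFireA pvRecord
  cases h : s.1.get? k with
  | none =>
    have hc : s.1.contains k = false := by
      rw [PySem.Dict.contains_eq_isSome_get?, h]; rfl
    simp [hc]
  | some w =>
    have hc : s.1.contains k = true := by
      rw [PySem.Dict.contains_eq_isSome_get?, h]; rfl
    have hg : s.1.getD k 0 = w := by
      rw [PySem.Dict.getD_eq_get?_getD, h]; rfl
    simp [hc, hg]

theorem pvImplies_eq_all (f : PySem.Dict String Int) (l : List (String × Int)) :
    pvImplies f l = l.all (fun kv => f.get? kv.1 == some kv.2) := by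
  induction l with
  | nil => rfl
  | cons kv rest ih =>
    simp only [pvImplies, List.all_cons]
    cases h : f.get? kv.1 with
    | none => simp [h]
    | some w =>
      by_cases hw : w = kv.2
      · simp [h, hw, ih]
      · simp [h, hw]

theorem pvImplies_eq (f : PySem.Dict String Int) (p : List (String × Int)) :
    pvImplies f (PySem.Dict.ofList p).items = pvSettles f p := by
  rw [pvImplies_eq_all]; rfl

theorem pvRecord_idem (k : String) (i : Int) (s : PvSt) :
    pvRecord k i (pvRecord k i s) = pvRecord k i s := by
  by_cases hc : s.1.contains k
  · by_cases hv : s.1.getD k 0 = i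
    · simp [pvRecord, hc, hv, PySem.Dict.insert_insert_self]
    · simp [pvRecord, hc, hv, PySem.Dict.insert_insert_self]
  · simp [pvRecord, hc, PySem.Dict.contains_insert_self, PySem.Dict.getD_insert_self,
      PySem.Dict.insert_insert_self]

theorem pvScanA_fired (k : String) (i : Int) (ps : List (List (String × Int)))
    (s : PvSt) (hs : pvRecord k i s = s) :
    ∀ dl, ∃ e, pvScanA k i ps (s, dl, true) = (s, dl ++ e, true) ∧ ∀ x ∈ e, x = k := by
  induction ps with
  | nil => intro dl; exact ⟨[], by simp [pvScanA], by simp⟩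
  | cons p ps ih =>
    intro dl
    by_cases hp : pvImplies s.1 (PySem.Dict.ofList p).items
    · obtain ⟨e, he, hek⟩ := ih (dl ++ [k])
      refine ⟨k :: e, ?_, ?_⟩
      · have h1 : pvScanA k i (p :: ps) (s, dl, true)
            = pvScanA k i ps (pvFireA k i s, dl ++ [k], true) := by
          simp [pvScanA, hp]
        rw [h1, pvFireA_eq_pvRecord, hs, he]; simp
      · intro x hx
        rcases List.mem_cons.mp hx with h | h
        · exact h
        · exact hek x h
    · obtain ⟨e, he, hek⟩ := ih dl
      refine ⟨e, ?_, hek⟩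
      have h1 : pvScanA k i (p :: ps) (s, dl, true) = pvScanA k i ps (s, dl, true) := by
        simp [pvScanA, hp]
      rw [h1, he]

theorem pvScanA_eq (k : String) (i : Int) (ps : List (List (String × Int)))
    (s : PvSt) : ∀ dl (sa : Bool), ∃ e,
    pvScanA k i ps (s, dl, sa) =
      ((if ps.any (fun p => pvSettles s.1 p) then pvRecord k i s else s), dl ++ e,
        (sa || ps.any (fun p => pvSettles s.1 p))) ∧
    (∀ x ∈ e, x = k) ∧ (e = [] ↔ ps.any (fun p => pvSettles s.1 p) = false) := by
  induction ps with
  | nil => intro dl sa; exact ⟨[], by simp [pvScanA], by simp, by simp⟩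
  | cons p ps ih =>
    intro dl sa
    by_cases hp : pvSettles s.1 p
    · obtain ⟨e, he, hek⟩ := pvScanA_fired k i ps (pvRecord k i s) (pvRecord_idem k i s) (dl ++ [k])
      refine ⟨k :: e, ?_, ?_, ?_⟩
      · have h1 : pvScanA k i (p :: ps) (s, dl, sa)
            = pvScanA k i ps (pvFireA k i s, dl ++ [k], true) := by
          simp [pvScanA, pvImplies_eq, hp]
        rw [h1, pvFireA_eq_pvRecord, he]
        simp [hp]
      · intro x hx
        rcases List.mem_cons.mp hx with h | h
        · exact h
        · exact hek x h
      · simp [hp]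
    · obtain ⟨e, he, hek, hee⟩ := ih dl sa
      refine ⟨e, ?_, hek, ?_⟩
      · have h1 : pvScanA k i (p :: ps) (s, dl, sa) = pvScanA k i ps (s, dl, sa) := by
          simp [pvScanA, pvImplies_eq, hp]
        rw [h1, he]; simp [hp]
      · simpa [hp] using hee

theorem pvRoundA_eq_pvPassB (items : List PvItem) :
    (items.map Prod.fst).Nodup → ∀ (s : PvSt) (dl : List String) (acc : List PvItem) (sa : Bool),
    ∃ E, (∀ x ∈ E, x ∈ items.map Prod.fst) ∧
      pvRoundA items (s, dl, sa) =
        ((pvPassB items (s, acc, sa)).1, dl ++ E, (pvPassB items (s, acc, sa)).2.2) ∧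
      (pvPassB items (s, acc, sa)).2.1 = acc ++ items.filter (fun it => !(E.contains it.1)) := by
  induction items with
  | nil =>
    intro _ s dl acc sa
    exact ⟨[], by simp, by simp [pvRoundA, pvPassB], by simp [pvPassB]⟩
  | cons it rest ih =>
    intro hnd s dl acc sa
    obtain ⟨name, rules⟩ := it
    simp only [List.map_cons] at hnd
    have hk : name ∉ rest.map Prod.fst := (List.nodup_cons.mp hnd).1
    have hnd' : (rest.map Prod.fst).Nodup := (List.nodup_cons.mp hnd).2
    obtain ⟨e0, he0, he0k, he0e⟩ := pvScanA_eq name 0 (PySem.List.pyGetD rules 0 []) s dl sa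
    obtain ⟨e1, he1, he1k, he1e⟩ :=
      pvScanA_eq name 1 (PySem.List.pyGetD rules 1 [])
        (if (PySem.List.pyGetD rules 0 []).any (fun p => pvSettles s.1 p) then pvRecord name 0 s else s)
        (dl ++ e0) (sa || (PySem.List.pyGetD rules 0 []).any (fun p => pvSettles s.1 p))
    set h0 := (PySem.List.pyGetD rules 0 []).any (fun p => pvSettles s.1 p) with hh0
    set s1 := (if h0 then pvRecord name 0 s else s) with hs1
    set h1 := (PySem.List.pyGetD rules 1 []).any (fun p => pvSettles s1.1 p) with hh1
    set s2 := (if h1 then pvRecord name 1 s1 else s1) with hs2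
    have hitem : pvItemA (name, rules) (s, dl, sa) = (s2, dl ++ e0 ++ e1, sa || h0 || h1) := by
      show pvScanA name 1 (PySem.List.pyGetD rules 1 [])
          (pvScanA name 0 (PySem.List.pyGetD rules 0 []) (s, dl, sa)) = _
      rw [he0, he1]
    have hstep : pvStepB (name, rules) s = (s2, h0 || h1) := by
      simp only [pvStepB, hs1, hs2, hh0, hh1]
    have hround : pvRoundA ((name, rules) :: rest) (s, dl, sa)
        = pvRoundA rest (pvItemA (name, rules) (s, dl, sa)) := rfl
    have hpass : pvPassB ((name, rules) :: rest) (s, acc, sa)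
        = (if (pvStepB (name, rules) s).2
            then pvPassB rest ((pvStepB (name, rules) s).1, acc, true)
            else pvPassB rest ((pvStepB (name, rules) s).1, acc ++ [(name, rules)], sa)) := rfl
    cases hfire : (h0 || h1) with
    | true =>
      obtain ⟨E', hEk, hA, hK⟩ := ih hnd' s2 (dl ++ e0 ++ e1) acc true
      have hsa : (sa || h0 || h1) = true := by
        rw [Bool.or_assoc, hfire, Bool.or_true]
      have hpass' : pvPassB ((name, rules) :: rest) (s, acc, sa) = pvPassB rest (s2, acc, true) := by
        rw [hpass, hstep, hfire]; rfl
      have hnamE : name ∈ e0 ++ e1 := by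
        rcases Bool.or_eq_true_iff.mp hfire with h | h
        · have : e0 ≠ [] := by
            intro hnil
            rw [he0e.mp hnil] at h; cases h
          obtain ⟨y, hy⟩ := List.exists_mem_of_ne_nil _ this
          rw [← he0k y hy] at *
          exact List.mem_append_left _ hy
        · have : e1 ≠ [] := by
            intro hnil
            rw [he1e.mp hnil] at h; cases h
          obtain ⟨y, hy⟩ := List.exists_mem_of_ne_nil _ this
          rw [← he1k y hy] at *
          exact List.mem_append_right _ hy
      refine ⟨e0 ++ e1 ++ E', ?_, ?_, ?_⟩
      · intro x hx
        rcases List.mem_append.mp hx with hx01 | hxE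
        · rcases List.mem_append.mp hx01 with h | h
          · simp [he0k x h]
          · simp [he1k x h]
        · exact List.mem_cons_of_mem _ (hEk x hxE)
      · rw [hround, hitem, hsa, hpass', hA]
        simp [List.append_assoc]
      · rw [hpass', hK]
        have hhead : ((e0 ++ e1 ++ E').contains name) = true :=
          List.contains_iff_mem.mpr (List.mem_append_left _ hnamE)
        rw [List.filter_cons]
        simp only [hhead, Bool.not_true, if_neg]
        congr 1
        apply List.filter_congr
        intro p hp
        have hpne : p.1 ≠ name := by
          intro he; exact hk (he ▸ List.mem_map_of_mem hp)
        have : ∀ x ∈ e0 ++ e1, x = name := by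
          intro x hx
          rcases List.mem_append.mp hx with h | h
          · exact he0k x h
          · exact he1k x h
        by_cases hpm : p.1 ∈ E'
        · have h1 : p.1 ∈ e0 ++ e1 ++ E' := List.mem_append_right _ hpm
          rw [List.contains_iff_mem.mpr h1, List.contains_iff_mem.mpr hpm]
        · have h1 : p.1 ∉ e0 ++ e1 ++ E' := by
            intro hmem
            rcases List.mem_append.mp hmem with h | h
            · exact hpne (this _ h)
            · exact hpm h
          have ha : (e0 ++ e1 ++ E').contains p.1 = false := by
            rw [Bool.eq_false_iff]; intro hc; exact h1 (List.contains_iff_mem.mp hc)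
          have hb : E'.contains p.1 = false := by
            rw [Bool.eq_false_iff]; intro hc; exact hpm (List.contains_iff_mem.mp hc)
          rw [ha, hb]
    | false =>
      obtain ⟨hf0, hf1⟩ := Bool.or_eq_false_iff.mp hfire
      have he0nil : e0 = [] := he0e.mpr hf0
      have he1nil : e1 = [] := he1e.mpr hf1
      have hs1s : s1 = s := by simp [hs1, hf0]
      have hs2s : s2 = s := by simp [hs2, hf1, hs1s]
      have hpass' : pvPassB ((name, rules) :: rest) (s, acc, sa)
          = pvPassB rest (s, acc ++ [(name, rules)], sa) := by
        rw [hpass, hstep, hfire, hs2s]; rfl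
      obtain ⟨E', hEk, hA, hK⟩ := ih hnd' s dl (acc ++ [(name, rules)]) sa
      refine ⟨E', ?_, ?_, ?_⟩
      · intro x hx; exact List.mem_cons_of_mem _ (hEk x hx)
      · rw [hround, hitem, hs2s, he0nil, he1nil, hf0, hf1]
        simp only [List.append_nil, Bool.or_false]
        rw [hpass', hA]
      · rw [hpass', hK]
        have hhead : (E'.contains name) = false := by
          rw [Bool.eq_false_iff]
          intro hc
          exact hk (hEk name (List.contains_iff_mem.mp hc))
        rw [List.filter_cons]
        simp only [hhead, Bool.not_false, if_pos]
        simp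

theorem foldl_erase_items (L : List String)
    (d : PySem.Dict String (List (List (List (String × Int))))) :
    (L.foldl (fun d k => d.erase k) d).items = d.items.filter (fun p => !(L.contains p.1)) := by
  induction L generalizing d with
  | nil => simp
  | cons k L ih =>
    rw [List.foldl_cons, ih]
    have herase : (d.erase k).items = d.items.filter (fun p => !(p.1 == k)) := rfl
    rw [herase, List.filter_filter]
    apply List.filter_congr
    intro p hp
    rw [List.contains_cons]
    cases hpk : (p.1 == k) <;> cases hpl : L.contains p.1 <;> simp [hpk, hpl]

theorem pvLoopA_eq_pvSettle : ∀ (n : Nat)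
    (pts : PySem.Dict String (List (List (List (String × Int))))) (s : PvSt),
    pts.items.length ≤ n → pts.keys.Nodup →
    pvLoopA (n + 1) pts s = pvSettle s pts.items := by
  intro n
  induction n with
  | zero =>
    intro pts s hlen hnd
    have hit : pts.items = [] := List.eq_nil_of_length_eq_zero (Nat.le_zero.mp hlen)
    rw [pvSettle, dif_pos hit]
    simp [pvLoopA, pvRoundA, hit]
  | succ n ih =>
    intro pts s hlen hnd
    by_cases hit : pts.items = []
    · rw [pvSettle, dif_pos hit]
      simp [pvLoopA, pvRoundA, hit]
    · have hndi : (pts.items.map Prod.fst).Nodup := by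
        simpa [PySem.Dict.keys] using hnd
      obtain ⟨E, hEk, hA, hK⟩ := pvRoundA_eq_pvPassB pts.items hndi s [] [] false
      rw [List.nil_append] at hA
      rw [List.nil_append] at hK
      have hitems' : ((PySem.Set.ofList E).foldl (fun d k => d.erase k) pts).items
          = pts.items.filter (fun it => !(E.contains it.1)) := by
        rw [foldl_erase_items]
        apply List.filter_congr
        intro p hp
        rw [contains_ofList_eq]
      rw [pvSettle, dif_neg hit]
      rw [pvLoopA, hA]
      by_cases hP : (pvPassB pts.items (s, [], false)).2.2 = true
      · rw [dif_pos hP]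
        have hsz : ((PySem.Set.ofList E).foldl (fun d k => d.erase k) pts).size
            = (pts.items.filter (fun it => !(E.contains it.1))).length :=
          congrArg List.length hitems'
        by_cases hKnil : pts.items.filter (fun it => !(E.contains it.1)) = []
        · have h0 : (((PySem.Set.ofList E).foldl (fun d k => d.erase k) pts).size == 0) = true := by
            rw [hsz, hKnil]; rfl
          rw [h0, Bool.or_true, if_pos rfl]
          have hKnil' : (pvPassB pts.items (s, [], false)).2.1 = [] := by rw [hK, hKnil]
          rw [hKnil', pvSettle, dif_pos rfl]
        · have hKlen : (pts.items.filter (fun it => !(E.contains it.1))).length ≠ 0 :=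
            fun h => hKnil (List.eq_nil_of_length_eq_zero h)
          have hc : (((PySem.Set.ofList E).foldl (fun d k => d.erase k) pts).size == 0) = false := by
            rw [hsz]; exact beq_eq_false_iff_ne.mpr hKlen
          have hcond : (!(pvPassB pts.items (s, [], false)).2.2
              || (((PySem.Set.ofList E).foldl (fun d k => d.erase k) pts).size == 0)) = false := by
            rw [hP, hc]; rfl
          rw [hcond, if_neg Bool.false_ne_true]
          have hprog := pvPassB_progress_lt pts.items (s, [], false) rfl hP
          rw [hK] at hprog
          simp only [List.length_nil, Nat.zero_add] at hprog
          have hlen' : ((PySem.Set.ofList E).foldl (fun d k => d.erase k) pts).items.length ≤ n := by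
            rw [hitems']
            exact Nat.le_of_lt_succ (Nat.lt_of_lt_of_le hprog hlen)
          have hnd' : ((PySem.Set.ofList E).foldl (fun d k => d.erase k) pts).keys.Nodup := by
            have hkeys : ((PySem.Set.ofList E).foldl (fun d k => d.erase k) pts).keys
                = (pts.items.filter (fun it => !(E.contains it.1))).map (fun p => p.1) := by
              simp only [PySem.Dict.keys]
              exact congrArg (List.map (fun p => p.1)) hitems'
            rw [hkeys]
            have hsub : ((pts.items.filter (fun it => !(E.contains it.1))).map (fun p => p.1)).Sublist
                (pts.items.map (fun p => p.1)) := (List.filter_sublist).map _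
            exact (by simpa using hndi : (pts.items.map (fun p => p.1)).Nodup).sublist hsub
          rw [ih _ _ hlen' hnd', hitems', ← hK]
      · rw [dif_neg hP]
        have hPf : (pvPassB pts.items (s, [], false)).2.2 = false := Bool.not_eq_true _ ▸ eq_false_of_ne_true hP
        have hcond : (!(pvPassB pts.items (s, [], false)).2.2
            || (((PySem.Set.ofList E).foldl (fun d k => d.erase k) pts).size == 0)) = true := by
          rw [hPf]; rfl
        rw [hcond, if_pos rfl]

-- ===== second half: port B equals the middle layer =====

abbrev PvEnt := String × Int × List (String × Int)

def pvItemsOfP (p : List (String × Int)) : List (String × Int) := (PySem.Dict.ofList p).items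

def pvMism (f : PySem.Dict String Int) (kv : String × Int) : Bool :=
  f.contains kv.1 && (f.getD kv.1 0 != kv.2)
def pvUncK (f : PySem.Dict String Int) (kv : String × Int) : Bool := !(f.contains kv.1)
def pvSatKV (f : PySem.Dict String Int) (kv : String × Int) : Bool := f.get? kv.1 == some kv.2

def pvBadL (f : PySem.Dict String Int) (l : List (String × Int)) : Bool := l.any (pvMism f)
def pvRemL (f : PySem.Dict String Int) (l : List (String × Int)) : Nat := l.countP (pvUncK f)
def pvSatL (f : PySem.Dict String Int) (l : List (String × Int)) : Bool := l.all (pvSatKV f)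

def pvBadE (f : PySem.Dict String Int) (t : PvEnt) : Bool := pvBadL f (pvItemsOfP t.2.2)
def pvRemE (f : PySem.Dict String Int) (t : PvEnt) : Int := (pvRemL f (pvItemsOfP t.2.2) : Int)
def pvSatE (f : PySem.Dict String Int) (t : PvEnt) : Bool := pvSatL f (pvItemsOfP t.2.2)

def pvPredE (f : PySem.Dict String Int) (n : String) (i : Int) (t : PvEnt) : Bool :=
  t.1 == n && t.2.1 == i && pvSatE f t
def pvCnt (f : PySem.Dict String Int) (E : List PvEnt) (n : String) (i : Int) : Int :=
  (E.countP (pvPredE f n i) : Int)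

def pvImpsItem (kv : PvItem) : List PvEnt :=
  ([0, 1] : List Int).flatMap (fun i => (PySem.List.pyGetD kv.2 i []).map (fun p => (kv.1, i, p)))
def pvImpsOf (items : List PvItem) : List PvEnt := items.flatMap pvImpsItem

def pvOccFrom (k : String) : Nat → List PvEnt → List (Nat × Int)
  | _, [] => []
  | j, t :: ts =>
    match (pvItemsOfP t.2.2).lookup k with
    | some v => (j, v) :: pvOccFrom k (j + 1) ts
    | none => pvOccFrom k (j + 1) ts

structure PvInvE (E : List PvEnt) (fixed : PySem.Dict String Int) (idx : PvIdx) : Prop where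
  names_eq : idx.names = E.map (fun t => t.1)
  sides_eq : idx.sides = E.map (fun t => t.2.1)
  rem_len : idx.remaining.length = E.length
  dead_len : idx.dead.length = E.length
  dead_eq : ∀ j (h : j < E.length), idx.dead.getD j false = pvBadE fixed E[j]
  rem_eq : ∀ j (h : j < E.length), pvBadE fixed E[j] = false →
      idx.remaining.getD j 0 = pvRemE fixed E[j]
  sat_eq : ∀ n i, idx.sat.getD (n, i) 0 = pvCnt fixed E n i
  occ_eq : ∀ k, fixed.contains k = false → idx.occ.getD k [] = pvOccFrom k 0 E

-- littleFacts: how bad/rem/sat react to fixing one more node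
theorem pvSatL_iff (f : PySem.Dict String Int) (l : List (String × Int)) :
    pvSatL f l = (!pvBadL f l && (pvRemL f l == 0)) := by
  induction l with
  | nil => simp [pvSatL, pvBadL, pvRemL]
  | cons kv l ih =>
    simp only [pvSatL, pvBadL, pvRemL, List.all_cons, List.any_cons, List.countP_cons] at *
    cases hg : f.get? kv.1 with
    | none =>
      have hc : f.contains kv.1 = false := by rw [PySem.Dict.contains_eq_isSome_get?, hg]; rfl
      simp [pvSatKV, pvMism, pvUncK, hg, hc]
    | some w =>
      have hc : f.contains kv.1 = true := by rw [PySem.Dict.contains_eq_isSome_get?, hg]; rfl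
      have hd : f.getD kv.1 0 = w := by rw [PySem.Dict.getD_eq_get?_getD, hg]; rfl
      by_cases hw : w = kv.2
      · simp [pvSatKV, pvMism, pvUncK, hg, hc, hd, hw, ih]
      · have h1 : (w == kv.2) = false := by simpa using hw
        have h2 : (w != kv.2) = true := by simp [bne, h1]
        simp [pvSatKV, pvMism, pvUncK, hg, hc, hd, h1, h2]

theorem pvLookup_none_keys {β : Type} (k : String) (l : List (String × β))
    (h : l.lookup k = none) : ∀ kv ∈ l, kv.1 ≠ k := by
  induction l with
  | nil => intro kv hkv; simp at hkv
  | cons a l ih =>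
    intro kv hkv
    by_cases hb : a.1 = k
    · exfalso
      have hbb : (k == a.1) = true := beq_iff_eq.mpr hb.symm
      simp [List.lookup, hbb] at h
    · have hlk : l.lookup k = none := by
        have hbb : (k == a.1) = false := beq_eq_false_iff_ne.mpr (fun he => hb he.symm)
        simpa [List.lookup, hbb] using h
      rcases List.mem_cons.mp hkv with rfl | hm
      · exact hb
      · exact ih hlk kv hm

theorem pvFacts_ptwise (f : PySem.Dict String Int) (k : String) (x : Int)
    (l : List (String × Int)) (h : ∀ kv ∈ l, kv.1 ≠ k) :
    pvBadL (f.insert k x) l = pvBadL f l ∧ pvRemL (f.insert k x) l = pvRemL f l ∧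
    pvSatL (f.insert k x) l = pvSatL f l := by
  induction l with
  | nil => exact ⟨rfl, rfl, rfl⟩
  | cons kv l ih =>
    have hne := h kv (List.mem_cons_self)
    obtain ⟨h1, h2, h3⟩ := ih (fun a ha => h a (List.mem_cons_of_mem _ ha))
    refine ⟨?_, ?_, ?_⟩
    · simp only [pvBadL, List.any_cons] at *
      rw [h1]
      simp [pvMism, PySem.Dict.contains_insert, PySem.Dict.getD_insert_of_ne _ _ _ hne,
        beq_eq_false_iff_ne.mpr hne]
    · simp only [pvRemL, List.countP_cons] at *
      rw [h2]
      simp [pvUncK, PySem.Dict.contains_insert, beq_eq_false_iff_ne.mpr hne]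
    · simp only [pvSatL, List.all_cons] at *
      rw [h3]
      simp [pvSatKV, PySem.Dict.get?_insert_of_ne _ _ hne]

theorem pvFacts_none (f : PySem.Dict String Int) (k : String) (x : Int)
    (l : List (String × Int)) (h : l.lookup k = none) :
    pvBadL (f.insert k x) l = pvBadL f l ∧ pvRemL (f.insert k x) l = pvRemL f l ∧
    pvSatL (f.insert k x) l = pvSatL f l :=
  pvFacts_ptwise f k x l (pvLookup_none_keys k l h)

theorem pvLookup_none_of_keys {β : Type} (k : String) (l : List (String × β))
    (h : ∀ kv ∈ l, kv.1 ≠ k) : l.lookup k = none := by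
  induction l with
  | nil => rfl
  | cons a l ih =>
    have hbb : (k == a.1) = false :=
      beq_eq_false_iff_ne.mpr (fun he => h a List.mem_cons_self he.symm)
    simp only [List.lookup, hbb]
    exact ih (fun kv hkv => h kv (List.mem_cons_of_mem _ hkv))

theorem pvBneComm (a b : Int) : (a != b) = (b != a) := by
  by_cases h : a = b
  · simp [h]
  · simp [bne, beq_eq_false_iff_ne.mpr h, beq_eq_false_iff_ne.mpr (Ne.symm h)]

theorem pvFacts_some (f : PySem.Dict String Int) (k : String) (x v : Int) :
    ∀ (l : List (String × Int)), (l.map Prod.fst).Nodup →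
    l.lookup k = some v → f.contains k = false →
    pvBadL (f.insert k x) l = (pvBadL f l || (v != x)) ∧
    pvRemL f l = pvRemL (f.insert k x) l + 1 ∧
    pvSatL f l = false := by
  intro l
  induction l with
  | nil => intro _ hl _; simp [List.lookup] at hl
  | cons a l ih =>
    intro hnd hl hk
    have hget : f.get? k = none := by
      rw [PySem.Dict.contains_eq_isSome_get?] at hk
      exact Option.not_isSome_iff_eq_none.mp (by simp [hk])
    by_cases hb : a.1 = k
    · have hbb : (k == a.1) = true := beq_iff_eq.mpr hb.symm
      have hv : a.2 = v := by
        have := hl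
        simp only [List.lookup, hbb] at this
        exact (Option.some.injEq _ _).mp this
      have hnotin : ∀ kv ∈ l, kv.1 ≠ k := by
        intro kv hkv heq
        have hnd2 := hnd
        rw [List.map_cons] at hnd2
        have hn := (List.nodup_cons.mp hnd2).1
        exact hn (by
          have he2 : kv.1 = a.1 := heq.trans hb.symm
          exact he2 ▸ List.mem_map_of_mem hkv)
      obtain ⟨p1, p2, p3⟩ := pvFacts_ptwise f k x l hnotin
      have hcontains' : (f.insert k x).contains a.1 = true := by
        rw [hb]; exact PySem.Dict.contains_insert_self f k x
      have hgetD' : (f.insert k x).getD a.1 0 = x := by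
        rw [hb]; exact PySem.Dict.getD_insert_self f k x 0
      have hmism : pvMism f a = false := by
        simp [pvMism, hb, hk]
      have hmism' : pvMism (f.insert k x) a = (x != v) := by
        simp [pvMism, hcontains', hgetD', hv]
      refine ⟨?_, ?_, ?_⟩
      · have e1 : pvBadL (f.insert k x) (a :: l) = ((x != v) || pvBadL (f.insert k x) l) := by
          simp [pvBadL, hmism']
        have e2 : pvBadL f (a :: l) = pvBadL f l := by
          simp [pvBadL, hmism]
        rw [e1, e2, p1, pvBneComm x v, Bool.or_comm]
      · have e1 : pvRemL f (a :: l) = pvRemL f l + 1 := by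
          simp [pvRemL, pvUncK, List.countP_cons, hb, hk]
        have e2 : pvRemL (f.insert k x) (a :: l) = pvRemL (f.insert k x) l := by
          simp [pvRemL, pvUncK, List.countP_cons, hcontains']
        rw [e1, e2, p2]
      · simp [pvSatL, pvSatKV, hb, hget]
    · have hbb : (k == a.1) = false := beq_eq_false_iff_ne.mpr (fun he => hb he.symm)
      have hl' : l.lookup k = some v := by simpa [List.lookup, hbb] using hl
      have hnd' : (l.map Prod.fst).Nodup := by
        have hnd2 := hnd
        rw [List.map_cons] at hnd2
        exact (List.nodup_cons.mp hnd2).2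
      obtain ⟨q1, q2, q3⟩ := ih hnd' hl' hk
      have hne : a.1 ≠ k := hb
      have hc' : (f.insert k x).contains a.1 = f.contains a.1 := by
        simp [PySem.Dict.contains_insert, beq_eq_false_iff_ne.mpr hne]
      have hd' : (f.insert k x).getD a.1 0 = f.getD a.1 0 :=
        PySem.Dict.getD_insert_of_ne _ _ _ hne
      have hg' : (f.insert k x).get? a.1 = f.get? a.1 :=
        PySem.Dict.get?_insert_of_ne _ _ hne
      refine ⟨?_, ?_, ?_⟩
      · simp only [pvBadL, List.any_cons, pvMism, hc', hd'] at *
        rw [q1, Bool.or_assoc]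
      · have e1 : pvRemL f (a :: l) = pvRemL f l + (if f.contains a.1 then 0 else 1) := by
          cases hfc : f.contains a.1 <;> simp [pvRemL, pvUncK, List.countP_cons, hfc]
        have e2 : pvRemL (f.insert k x) (a :: l)
            = pvRemL (f.insert k x) l + (if f.contains a.1 then 0 else 1) := by
          cases hfc : f.contains a.1 <;> simp [pvRemL, pvUncK, List.countP_cons, hc', hfc]
        rw [e1, e2]
        omega
      · simp only [pvSatL, List.all_cons, pvSatKV, hg'] at *
        rw [q3, Bool.and_false]

theorem pvOccFrom_append (k : String) (E F : List PvEnt) (j : Nat) :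
    pvOccFrom k j (E ++ F) = pvOccFrom k j E ++ pvOccFrom k (j + E.length) F := by
  induction E generalizing j with
  | nil => simp [pvOccFrom]
  | cons t E ih =>
    have harith : j + 1 + E.length = j + (t :: E).length := by
      simp [List.length_cons]; omega
    cases hm : (pvItemsOfP t.2.2).lookup k with
    | some v =>
      simp only [List.cons_append, pvOccFrom, hm, ih, harith, List.cons_append]
    | none =>
      simp only [List.cons_append, pvOccFrom, hm, ih, harith]

-- the hybrid invariant during fix's fold: entries of E already see the new fixed dict,
-- entries of F still see the old one
structure PvMidInv (fixed fixed' : PySem.Dict String Int)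
    (occ0 : PySem.Dict String (List (Nat × Int)))
    (E F : List PvEnt) (idx : PvIdx) : Prop where
  names_eq : idx.names = (E ++ F).map (fun t => t.1)
  sides_eq : idx.sides = (E ++ F).map (fun t => t.2.1)
  rem_len : idx.remaining.length = E.length + F.length
  dead_len : idx.dead.length = E.length + F.length
  dead_eqE : ∀ j (h : j < E.length), idx.dead.getD j false = pvBadE fixed' E[j]
  rem_eqE : ∀ j (h : j < E.length), pvBadE fixed' E[j] = false →
      idx.remaining.getD j 0 = pvRemE fixed' E[j]
  dead_eqF : ∀ j (h : j < F.length), idx.dead.getD (E.length + j) false = pvBadE fixed F[j]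
  rem_eqF : ∀ j (h : j < F.length), pvBadE fixed F[j] = false →
      idx.remaining.getD (E.length + j) 0 = pvRemE fixed F[j]
  sat_eq : ∀ n i, idx.sat.getD (n, i) 0 = pvCnt fixed' E n i + pvCnt fixed F n i
  occ_const : idx.occ = occ0

theorem pvGetDSetSelf {α : Type} (l : List α) (n : Nat) (a d : α) (h : n < l.length) :
    (l.set n a).getD n d = a := by
  rw [List.getD_eq_getElem?_getD, List.getElem?_set]
  simp [h]

theorem pvGetDSetNe {α : Type} (l : List α) (n j : Nat) (a d : α) (h : n ≠ j) :
    (l.set n a).getD j d = l.getD j d := by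
  rw [List.getD_eq_getElem?_getD, List.getElem?_set, if_neg h, ← List.getD_eq_getElem?_getD]

theorem pvGetDMapMid {α : Type} [Inhabited α] (f : PvEnt → α) (E : List PvEnt) (t : PvEnt)
    (F : List PvEnt) (d : α) : ((E ++ t :: F).map f).getD E.length d = f t := by
  rw [List.map_append, List.getD_append_right _ _ _ _ (by simp)]
  simp

theorem pvCntAppendSingle (f : PySem.Dict String Int) (E : List PvEnt) (t : PvEnt)
    (n : String) (i : Int) :
    pvCnt f (E ++ [t]) n i = pvCnt f E n i + (if pvPredE f n i t then 1 else 0) := by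
  simp only [pvCnt, List.countP_append, List.countP_cons, List.countP_nil]
  push_cast
  split <;> ring

theorem pvCntConsSingle (f : PySem.Dict String Int) (F : List PvEnt) (t : PvEnt)
    (n : String) (i : Int) :
    pvCnt f (t :: F) n i = (if pvPredE f n i t then 1 else 0) + pvCnt f F n i := by
  simp only [pvCnt, List.countP_cons]
  push_cast
  split <;> ring

theorem pvPredIndicator (f : PySem.Dict String Int) (t : PvEnt) (hs : pvSatE f t = true)
    (n : String) (i : Int) :
    (if pvPredE f n i t then (1 : Int) else 0) = (if (n, i) = ((t.1, t.2.1) : String × Int) then 1 else 0) := by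
  by_cases hni : (n, i) = ((t.1, t.2.1) : String × Int)
  · have h1 : n = t.1 := congrArg Prod.fst hni
    have h2 : i = t.2.1 := congrArg Prod.snd hni
    simp [pvPredE, h1.symm, h2.symm, hs, hni]
  · rw [if_neg hni]
    have : pvPredE f n i t = false := by
      by_cases hna : t.1 = n
      · have hii : ¬ t.2.1 = i := fun hii => hni (by rw [hna, hii])
        simp [pvPredE, beq_eq_false_iff_ne.mpr hii]
      · simp [pvPredE, beq_eq_false_iff_ne.mpr hna]
    simp [this]

theorem pvPredOfNotSat (f : PySem.Dict String Int) (t : PvEnt) (hs : pvSatE f t = false)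
    (n : String) (i : Int) : pvPredE f n i t = false := by
  simp [pvPredE, hs]

theorem pvMidInv_push (fixed fixed' : PySem.Dict String Int)
    (occ0 : PySem.Dict String (List (Nat × Int)))
    (E : List PvEnt) (t : PvEnt) (F : List PvEnt) (idx idx' : PvIdx)
    (hI : PvMidInv fixed fixed' occ0 E (t :: F) idx)
    (hn : idx'.names = idx.names) (hs : idx'.sides = idx.sides) (ho : idx'.occ = idx.occ)
    (hrlen : idx'.remaining.length = idx.remaining.length)
    (hdlen : idx'.dead.length = idx.dead.length)
    (hother_d : ∀ j, j ≠ E.length → idx'.dead.getD j false = idx.dead.getD j false)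
    (hother_r : ∀ j, j ≠ E.length → idx'.remaining.getD j 0 = idx.remaining.getD j 0)
    (hd_t : idx'.dead.getD E.length false = pvBadE fixed' t)
    (hr_t : pvBadE fixed' t = false → idx'.remaining.getD E.length 0 = pvRemE fixed' t)
    (hsat' : ∀ n i, idx'.sat.getD (n, i) 0 = idx.sat.getD (n, i) 0
        + (if pvPredE fixed' n i t then 1 else 0) - (if pvPredE fixed n i t then 1 else 0)) :
    PvMidInv fixed fixed' occ0 (E ++ [t]) F idx' := by
  obtain ⟨qn, qs, qrl, qdl, qdeE, qreE, qdeF, qreF, qsat, qocc⟩ := hI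
  refine ⟨?_, ?_, ?_, ?_, ?_, ?_, ?_, ?_, ?_, ?_⟩
  · rw [hn, qn, List.append_cons]
  · rw [hs, qs, List.append_cons]
  · rw [hrlen, qrl]; simp; omega
  · rw [hdlen, qdl]; simp; omega
  · intro j hj
    simp only [List.length_append, List.length_cons, List.length_nil] at hj
    by_cases hjE : j < E.length
    · rw [hother_d j (by omega), List.getElem_append_left hjE]
      exact qdeE j hjE
    · have hje : j = E.length := by omega
      subst hje
      rw [List.getElem_concat_length rfl]
      exact hd_t
  · intro j hj hbad
    simp only [List.length_append, List.length_cons, List.length_nil] at hj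
    by_cases hjE : j < E.length
    · rw [List.getElem_append_left hjE] at hbad ⊢
      rw [hother_r j (by omega)]
      exact qreE j hjE hbad
    · have hje : j = E.length := by omega
      subst hje
      rw [List.getElem_concat_length rfl] at hbad ⊢
      exact hr_t hbad
  · intro j hj
    have harith : (E ++ [t]).length + j = E.length + (j + 1) := by simp; omega
    rw [harith, hother_d _ (by omega)]
    have hq := qdeF (j + 1) (by simp; omega)
    simpa using hq
  · intro j hj hbad
    have harith : (E ++ [t]).length + j = E.length + (j + 1) := by simp; omega
    rw [harith, hother_r _ (by omega)]
    have hq := qreF (j + 1) (by simp; omega)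
    simpa using hq hbad
  · intro n i
    have h1 := hsat' n i
    have h2 := qsat n i
    have h3 := pvCntAppendSingle fixed' E t n i
    have h4 := pvCntConsSingle fixed F t n i
    omega
  · rw [ho]; exact qocc

theorem pvFixFold (k : String) (x : Int) (fixed : PySem.Dict String Int)
    (hk : fixed.contains k = false) (occ0 : PySem.Dict String (List (Nat × Int))) :
    ∀ (F E : List PvEnt) (idx : PvIdx),
    PvMidInv fixed (fixed.insert k x) occ0 E F idx →
    PvMidInv fixed (fixed.insert k x) occ0 (E ++ F) []
      ((pvOccFrom k E.length F).foldl (pvFixStep x) idx) := by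
  intro F
  induction F with
  | nil =>
    intro E idx hI
    rw [List.append_nil]
    exact hI
  | cons t F ih =>
    intro E idx hI
    have hdead_t : idx.dead.getD E.length false = pvBadE fixed t := by
      have h0 := hI.dead_eqF 0 (by simp)
      simpa using h0
    have hrem_t : pvBadE fixed t = false → idx.remaining.getD E.length 0 = pvRemE fixed t := by
      intro hb
      have h0 := hI.rem_eqF 0 (by simp)
      simpa using h0 hb
    have hdl : idx.dead.length = E.length + (t :: F).length := hI.dead_len
    have hrl : idx.remaining.length = E.length + (t :: F).length := hI.rem_len
    have hndt : ((pvItemsOfP t.2.2).map Prod.fst).Nodup := by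
      have := PySem.Dict.nodup_keys_ofList t.2.2
      simpa [PySem.Dict.keys, pvItemsOfP] using this
    have hlenE1 : (E ++ [t]).length = E.length + 1 := by simp
    have hnamet : idx.names.getD E.length "" = t.1 := by
      rw [hI.names_eq]
      exact pvGetDMapMid _ E t F ""
    have hsidet : idx.sides.getD E.length 0 = t.2.1 := by
      rw [hI.sides_eq]
      exact pvGetDMapMid _ E t F 0
    cases hlk : (pvItemsOfP t.2.2).lookup k with
    | none =>
      obtain ⟨f1, f2, f3⟩ := pvFacts_none fixed k x (pvItemsOfP t.2.2) hlk
      have hpush : PvMidInv fixed (fixed.insert k x) occ0 (E ++ [t]) F idx := by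
        refine pvMidInv_push fixed _ occ0 E t F idx idx hI rfl rfl rfl rfl rfl
          (fun _ _ => rfl) (fun _ _ => rfl) ?_ ?_ ?_
        · rw [hdead_t]
          exact (show pvBadE (fixed.insert k x) t = pvBadE fixed t from f1).symm
        · intro hb
          rw [show pvBadE (fixed.insert k x) t = pvBadE fixed t from f1] at hb
          rw [hrem_t hb]
          show (pvRemL fixed (pvItemsOfP t.2.2) : Int) = (pvRemL (fixed.insert k x) (pvItemsOfP t.2.2) : Int)
          rw [f2]
        · intro n i
          have hse : pvSatE (fixed.insert k x) t = pvSatE fixed t := f3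
          rw [show pvPredE (fixed.insert k x) n i t = pvPredE fixed n i t by simp [pvPredE, hse]]
          omega
      rw [show pvOccFrom k E.length (t :: F) = pvOccFrom k (E.length + 1) F from by
        simp [pvOccFrom, hlk]]
      rw [List.append_cons, ← hlenE1]
      exact ih (E ++ [t]) idx hpush
    | some v =>
      obtain ⟨g1, g2, g3⟩ := pvFacts_some fixed k x v (pvItemsOfP t.2.2) hndt hlk hk
      have G1 : pvBadE (fixed.insert k x) t = (pvBadE fixed t || (v != x)) := g1
      have G2 : pvRemE fixed t = pvRemE (fixed.insert k x) t + 1 := by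
        rw [pvRemE, pvRemE, g2]; push_cast; ring
      have G3 : pvSatE fixed t = false := g3
      have hIndF : ∀ n i, pvPredE fixed n i t = false := pvPredOfNotSat fixed t G3
      have hoccstep : pvOccFrom k E.length (t :: F)
          = (E.length, v) :: pvOccFrom k (E.length + 1) F := by
        simp [pvOccFrom, hlk]
      have hfold : (pvOccFrom k E.length (t :: F)).foldl (pvFixStep x) idx
          = (pvOccFrom k (E.length + 1) F).foldl (pvFixStep x) (pvFixStep x idx (E.length, v)) := by
        rw [hoccstep, List.foldl_cons]
      have hdeadt' : idx.dead[E.length]?.getD false = pvBadE fixed t := by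
        rw [← List.getD_eq_getElem?_getD]; exact hdead_t
      rw [hfold]
      have hdone : ∀ idx1 : PvIdx, pvFixStep x idx (E.length, v) = idx1 →
          PvMidInv fixed (fixed.insert k x) occ0 (E ++ [t]) F idx1 →
          PvMidInv fixed (fixed.insert k x) occ0 (E ++ t :: F) []
            ((pvOccFrom k (E.length + 1) F).foldl (pvFixStep x) (pvFixStep x idx (E.length, v))) := by
        intro idx1 hstep hpush
        rw [hstep, List.append_cons, ← hlenE1]
        exact ih (E ++ [t]) idx1 hpush
      by_cases hbt : pvBadE fixed t = true
      · -- the implicant is already dead: the step is a no-op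
        have hstep : pvFixStep x idx (E.length, v) = idx := by
          simp [pvFixStep, hdeadt', hbt]
        have hse : pvSatE (fixed.insert k x) t = false := by
          rw [pvSatE, pvSatL_iff]
          have hb1 : pvBadL fixed (pvItemsOfP t.2.2) = true := hbt
          rw [g1, hb1]
          rfl
        refine hdone idx hstep ?_
        refine pvMidInv_push fixed _ occ0 E t F idx idx hI rfl rfl rfl rfl rfl
          (fun _ _ => rfl) (fun _ _ => rfl) ?_ ?_ ?_
        · rw [hdead_t, hbt, G1, hbt]
          rfl
        · intro hb
          rw [G1, hbt] at hb
          cases hb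
        · intro n i
          rw [pvPredOfNotSat _ t hse n i, hIndF n i]
          simp
      · have hbf : pvBadE fixed t = false := by
          cases h : pvBadE fixed t
          · rfl
          · exact absurd h hbt
        have hremt := hrem_t hbf
        have hEld : E.length < idx.dead.length := by rw [hdl]; simp
        have hElr : E.length < idx.remaining.length := by rw [hrl]; simp
        by_cases hvx : v = x
        · -- matching literal: decrement the counter
          have hbne : (v == x) = true := beq_iff_eq.mpr hvx
          have hbad' : pvBadE (fixed.insert k x) t = false := by
            rw [G1, hbf, hvx]
            simp
          have hr : idx.remaining.getD E.length 0 - 1 = pvRemE (fixed.insert k x) t := by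
            rw [hremt, G2]; ring
          have hremq : idx.remaining[E.length]?.getD 0 = idx.remaining.getD E.length 0 :=
            (List.getD_eq_getElem?_getD (l := idx.remaining)).symm
          have hnamet' : idx.names[E.length]?.getD "" = t.1 := by
            rw [← List.getD_eq_getElem?_getD]; exact hnamet
          have hsidet' : idx.sides[E.length]?.getD 0 = t.2.1 := by
            rw [← List.getD_eq_getElem?_getD]; exact hsidet
          by_cases hr0 : (idx.remaining.getD E.length 0 - 1 == (0 : Int)) = true
          · -- the implicant becomes satisfied: bump the sat counter
            have hsatE' : pvSatE (fixed.insert k x) t = true := by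
              have hz : pvRemL (fixed.insert k x) (pvItemsOfP t.2.2) = 0 := by
                have h1 : idx.remaining.getD E.length 0 - 1 = 0 := beq_iff_eq.mp hr0
                rw [h1] at hr
                have h2 := hr.symm
                rw [pvRemE] at h2
                exact_mod_cast h2
              rw [pvSatE, pvSatL_iff]
              have hb2 : pvBadL (fixed.insert k x) (pvItemsOfP t.2.2) = false := hbad'
              rw [hb2, hz]
              rfl
            have hstep : pvFixStep x idx (E.length, v) =
                { idx with
                  remaining := idx.remaining.set E.length (idx.remaining.getD E.length 0 - 1),
                  sat := idx.sat.insert (t.1, t.2.1) (idx.sat.getD (t.1, t.2.1) 0 + 1) } := by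
              have hr0p : idx.remaining[E.length]?.getD 0 - 1 = 0 := by
                rw [hremq]; exact beq_iff_eq.mp hr0
              simp [pvFixStep, hdeadt', hbf, hbne, hr0p, hnamet', hsidet']
            refine hdone _ hstep ?_
            refine pvMidInv_push fixed _ occ0 E t F idx _ hI rfl rfl rfl (by simp) rfl
              (fun _ _ => rfl) (fun j hj => pvGetDSetNe _ _ _ _ _ (fun he => hj he.symm)) ?_ ?_ ?_
            · show idx.dead.getD E.length false = pvBadE (fixed.insert k x) t
              rw [hdead_t, hbf, hbad']
            · intro _
              show (idx.remaining.set E.length (idx.remaining.getD E.length 0 - 1)).getD E.length 0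
                  = pvRemE (fixed.insert k x) t
              rw [pvGetDSetSelf _ _ _ _ hElr]
              exact hr
            · intro n i
              show (idx.sat.insert (t.1, t.2.1) (idx.sat.getD (t.1, t.2.1) 0 + 1)).getD (n, i) 0
                  = idx.sat.getD (n, i) 0 + (if pvPredE (fixed.insert k x) n i t then 1 else 0)
                    - (if pvPredE fixed n i t then 1 else 0)
              rw [hIndF n i, pvPredIndicator _ t hsatE' n i]
              by_cases hni : (n, i) = ((t.1, t.2.1) : String × Int)
              · rw [hni, PySem.Dict.getD_insert_self, if_pos rfl]
                simp
              · rw [PySem.Dict.getD_insert, if_neg hni, if_neg hni]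
                simp
          · -- still unsatisfied: only the counter changes
            have hse : pvSatE (fixed.insert k x) t = false := by
              have hz : (pvRemL (fixed.insert k x) (pvItemsOfP t.2.2) == 0) = false := by
                refine beq_eq_false_iff_ne.mpr (fun h0 => ?_)
                refine hr0 ?_
                rw [hr]
                show (pvRemE (fixed.insert k x) t == (0 : Int)) = true
                rw [pvRemE, h0]
                rfl
              rw [pvSatE, pvSatL_iff, hz]
              simp
            have hstep : pvFixStep x idx (E.length, v) =
                { idx with
                  remaining := idx.remaining.set E.length (idx.remaining.getD E.length 0 - 1) } := by
              have hr0n : ¬(idx.remaining[E.length]?.getD 0 - 1 = 0) := by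
                rw [hremq]; exact fun h => hr0 (beq_iff_eq.mpr h)
              simp [pvFixStep, hdeadt', hbf, hbne, hr0n]
            refine hdone _ hstep ?_
            refine pvMidInv_push fixed _ occ0 E t F idx _ hI rfl rfl rfl (by simp) rfl
              (fun _ _ => rfl) (fun j hj => pvGetDSetNe _ _ _ _ _ (fun he => hj he.symm)) ?_ ?_ ?_
            · show idx.dead.getD E.length false = pvBadE (fixed.insert k x) t
              rw [hdead_t, hbf, hbad']
            · intro _
              show (idx.remaining.set E.length (idx.remaining.getD E.length 0 - 1)).getD E.length 0
                  = pvRemE (fixed.insert k x) t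
              rw [pvGetDSetSelf _ _ _ _ hElr]
              exact hr
            · intro n i
              rw [pvPredOfNotSat _ t hse n i, hIndF n i]
              simp
        · -- contradicting literal: the implicant dies
          have hbne : (v == x) = false := beq_eq_false_iff_ne.mpr hvx
          have hbad' : pvBadE (fixed.insert k x) t = true := by
            rw [G1, hbf]
            simp [bne, hbne]
          have hse : pvSatE (fixed.insert k x) t = false := by
            rw [pvSatE, pvSatL_iff]
            have hb2 : pvBadL (fixed.insert k x) (pvItemsOfP t.2.2) = true := hbad'
            rw [hb2]
            rfl
          have hstep : pvFixStep x idx (E.length, v) =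
              { idx with dead := idx.dead.set E.length true } := by
            simp [pvFixStep, hdeadt', hbf, hbne]
          refine hdone _ hstep ?_
          refine pvMidInv_push fixed _ occ0 E t F idx _ hI rfl rfl rfl rfl (by simp)
            (fun j hj => pvGetDSetNe _ _ _ _ _ (fun he => hj he.symm)) (fun _ _ => rfl) ?_ ?_ ?_
          · show (idx.dead.set E.length true).getD E.length false = pvBadE (fixed.insert k x) t
            rw [pvGetDSetSelf _ _ _ _ hEld, hbad']
          · intro hb
            rw [hbad'] at hb
            cases hb
          · intro n i
            rw [pvPredOfNotSat _ t hse n i, hIndF n i]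
            simp

theorem pvFixC_inv (E : List PvEnt) (k : String) (x : Int)
    (fixed : PySem.Dict String Int) (idx : PvIdx)
    (hk : fixed.contains k = false) (hI : PvInvE E fixed idx) :
    (pvFixC k x fixed idx).1 = fixed.insert k x ∧
    PvInvE E (fixed.insert k x) (pvFixC k x fixed idx).2 := by
  obtain ⟨hn, hs, hrl, hdl, hde, hre, hsat, hocc⟩ := hI
  refine ⟨rfl, ?_⟩
  have hmid0 : PvMidInv fixed (fixed.insert k x) idx.occ [] E idx := by
    refine ⟨by simpa using hn, by simpa using hs, by simpa using hrl, by simpa using hdl,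
      ?_, ?_, ?_, ?_, ?_, rfl⟩
    · intro j h; simp at h
    · intro j h; simp at h
    · intro j h; simpa using hde j h
    · intro j h; simpa using hre j h
    · intro n i
      have h2 := hsat n i
      simp only [pvCnt, List.countP_nil] at h2 ⊢
      omega
  have hmid1 := pvFixFold k x fixed hk idx.occ E [] idx hmid0
  have hocclist : idx.occ.getD k [] = pvOccFrom k 0 E := hocc k hk
  have hres : (pvFixC k x fixed idx).2 = (pvOccFrom k 0 E).foldl (pvFixStep x) idx := by
    show (idx.occ.getD k []).foldl (pvFixStep x) idx = _
    rw [hocclist]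
  rw [hres]
  have hmid2 := hmid1
  simp only [List.length_nil] at hmid2
  obtain ⟨qn, qs, qrl, qdl, qdeE, qreE, _, _, qsat, qocc⟩ := hmid2
  refine ⟨by simpa using qn, by simpa using qs, by simpa using qrl, by simpa using qdl,
    ?_, ?_, ?_, ?_⟩
  · intro j h; have := qdeE j (by simpa using h); simpa using this
  · intro j h hb
    have := qreE j (by simpa using h) (by simpa using hb)
    simpa using this
  · intro n i
    have h2 := qsat n i
    simp only [pvCnt, List.countP_nil, List.nil_append] at h2 ⊢
    omega
  · intro k' hk'
    have hcc : (k' == k || fixed.contains k') = false := by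
      rw [← PySem.Dict.contains_insert fixed k k' x]
      exact hk'
    obtain ⟨hne, hcf⟩ := Bool.or_eq_false_iff.mp hcc
    rw [qocc]
    exact hocc k' hcf

-- build phase establishes the invariant
theorem pvLitFold (fixed : PySem.Dict String Int) (j : Nat) :
    ∀ (l : List (String × Int)) (r0 : Int) (d0 : Bool)
      (occ0 : PySem.Dict String (List (Nat × Int))), (l.map Prod.fst).Nodup →
    (l.foldl (pvAddLit fixed j) (r0, d0, occ0)).1 = r0 + (pvRemL fixed l : Int) ∧
    (l.foldl (pvAddLit fixed j) (r0, d0, occ0)).2.1 = (d0 || pvBadL fixed l) ∧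
    ∀ k, (l.foldl (pvAddLit fixed j) (r0, d0, occ0)).2.2.getD k [] =
      occ0.getD k [] ++
        (match l.lookup k with
         | some v => if fixed.contains k then [] else [(j, v)]
         | none => []) := by
  intro l
  induction l with
  | nil =>
    intro r0 d0 occ0 _
    refine ⟨by simp [pvRemL], by simp [pvBadL], ?_⟩
    intro k
    simp [List.lookup]
  | cons kv l ih =>
    intro r0 d0 occ0 hnd
    have hnd2 := hnd
    rw [List.map_cons] at hnd2
    have hkn : kv.1 ∉ l.map Prod.fst := (List.nodup_cons.mp hnd2).1
    have hnd' : (l.map Prod.fst).Nodup := (List.nodup_cons.mp hnd2).2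
    have hlknone : l.lookup kv.1 = none :=
      pvLookup_none_of_keys kv.1 l (fun a ha he => hkn (he ▸ List.mem_map_of_mem ha))
    have hfold : (kv :: l).foldl (pvAddLit fixed j) (r0, d0, occ0)
        = l.foldl (pvAddLit fixed j) (pvAddLit fixed j (r0, d0, occ0) kv) := rfl
    cases hc : fixed.contains kv.1 with
    | true =>
      have hstep : pvAddLit fixed j (r0, d0, occ0) kv = (r0, d0 || pvMism fixed kv, occ0) := by
        unfold pvAddLit
        rw [hc]
        cases hm : (fixed.getD kv.1 0 != kv.2) with
        | true => simp [pvMism, hc, hm]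
        | false => simp [pvMism, hc, hm]
      obtain ⟨q1, q2, q3⟩ := ih r0 (d0 || pvMism fixed kv) occ0 hnd'
      rw [hfold, hstep]
      refine ⟨?_, ?_, ?_⟩
      · rw [q1]
        have : pvRemL fixed (kv :: l) = pvRemL fixed l := by
          simp [pvRemL, List.countP_cons, pvUncK, hc]
        rw [this]
      · rw [q2]
        have : pvBadL fixed (kv :: l) = (pvMism fixed kv || pvBadL fixed l) := by
          simp [pvBadL]
        rw [this, Bool.or_assoc]
      · intro k
        rw [q3 k]
        by_cases hkk : k = kv.1
        · have hbb : (k == kv.1) = true := beq_iff_eq.mpr hkk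
          rw [hkk] at *
          simp only [List.lookup, beq_self_eq_true, hlknone, hc]
          simp
        · have hbb : (k == kv.1) = false := beq_eq_false_iff_ne.mpr hkk
          simp only [List.lookup, hbb]
    | false =>
      have hstep : pvAddLit fixed j (r0, d0, occ0) kv
          = (r0 + 1, d0, occ0.insert kv.1 (occ0.getD kv.1 [] ++ [(j, kv.2)])) := by
        simp [pvAddLit, hc]
      obtain ⟨q1, q2, q3⟩ :=
        ih (r0 + 1) d0 (occ0.insert kv.1 (occ0.getD kv.1 [] ++ [(j, kv.2)])) hnd'
      rw [hfold, hstep]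
      refine ⟨?_, ?_, ?_⟩
      · rw [q1]
        have : pvRemL fixed (kv :: l) = pvRemL fixed l + 1 := by
          simp [pvRemL, List.countP_cons, pvUncK, hc]
        rw [this]
        push_cast
        ring
      · rw [q2]
        have : pvBadL fixed (kv :: l) = pvBadL fixed l := by
          simp [pvBadL, pvMism, hc]
        rw [this]
      · intro k
        rw [q3 k]
        by_cases hkk : k = kv.1
        · have hlk : (kv :: l).lookup k = some kv.2 := by
            simp [List.lookup, beq_iff_eq.mpr hkk]
          rw [hlk, hkk]
          rw [PySem.Dict.getD_insert_self, hlknone]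
          simp [hc]
        · have hbb : (k == kv.1) = false := beq_eq_false_iff_ne.mpr hkk
          rw [PySem.Dict.getD_insert_of_ne _ _ _ hkk]
          simp only [List.lookup, hbb]

theorem pvAddImp_inv (fixed : PySem.Dict String Int) (name : String) (i : Int)
    (p : List (String × Int)) (E : List PvEnt) (idx : PvIdx)
    (hI : PvInvE E fixed idx) :
    PvInvE (E ++ [(name, i, p)]) fixed (pvAddImp fixed name i idx p) := by
  obtain ⟨hn, hs, hrl, hdl, hde, hre, hsat, hocc⟩ := hI
  have hjl : idx.names.length = E.length := by rw [hn]; simp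
  have hndl : ((pvItemsOfP p).map Prod.fst).Nodup := by
    have := PySem.Dict.nodup_keys_ofList p
    simpa [PySem.Dict.keys, pvItemsOfP] using this
  obtain ⟨f1, f2, f3⟩ :=
    pvLitFold fixed idx.names.length (pvItemsOfP p) 0 false idx.occ hndl
  have hr :
      ((pvItemsOfP p).foldl (pvAddLit fixed idx.names.length) (0, false, idx.occ)).1
        = pvRemE fixed (name, i, p) ∧
      ((pvItemsOfP p).foldl (pvAddLit fixed idx.names.length) (0, false, idx.occ)).2.1
        = pvBadE fixed (name, i, p) := by
    constructor
    · rw [f1, pvRemE]; ring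
    · rw [f2, pvBadE]; simp
  set r := (pvItemsOfP p).foldl (pvAddLit fixed idx.names.length) (0, false, idx.occ) with hrdef
  have hexp : pvAddImp fixed name i idx p =
      { names := idx.names ++ [name], sides := idx.sides ++ [i],
        remaining := idx.remaining ++ [r.1], dead := idx.dead ++ [r.2.1],
        sat := if r.1 == 0 && !r.2.1 then
            idx.sat.insert (name, i) (idx.sat.getD (name, i) 0 + 1)
          else idx.sat,
        occ := r.2.2 } := rfl
  rw [hexp]
  have hsatE : (r.1 == 0 && !r.2.1) = pvSatE fixed (name, i, p) := by
    rw [hr.1, hr.2, pvSatE, pvSatL_iff, pvRemE, pvBadE]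
    by_cases hz : pvRemL fixed (pvItemsOfP (name, i, p).2.2) = 0
    · simp [hz, Bool.and_comm]
    · have h1 : ((pvRemL fixed (pvItemsOfP (name, i, p).2.2) : Int) == 0) = false :=
        beq_eq_false_iff_ne.mpr (by exact_mod_cast hz)
      have h2 : (pvRemL fixed (pvItemsOfP (name, i, p).2.2) == 0) = false :=
        beq_eq_false_iff_ne.mpr hz
      simp [h1, h2]
  refine ⟨?_, ?_, ?_, ?_, ?_, ?_, ?_, ?_⟩
  · rw [hn]; simp
  · rw [hs]; simp
  · simp [hrl]
  · simp [hdl]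
  · intro j hj
    simp only [List.length_append, List.length_cons, List.length_nil] at hj
    by_cases hjE : j < E.length
    · rw [List.getD_append _ _ _ _ (by omega), List.getElem_append_left hjE]
      exact hde j hjE
    · have hje : j = E.length := by omega
      subst hje
      rw [List.getD_append_right _ _ _ _ (by omega)]
      have h0 : E.length - idx.dead.length = 0 := by omega
      rw [h0]
      rw [List.getElem_concat_length rfl]
      simpa using hr.2
  · intro j hj hbad
    simp only [List.length_append, List.length_cons, List.length_nil] at hj
    by_cases hjE : j < E.length
    · rw [List.getElem_append_left hjE] at hbad ⊢
      rw [List.getD_append _ _ _ _ (by omega)]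
      exact hre j hjE hbad
    · have hje : j = E.length := by omega
      subst hje
      rw [List.getElem_concat_length rfl] at hbad ⊢
      rw [List.getD_append_right _ _ _ _ (by omega)]
      have h0 : E.length - idx.remaining.length = 0 := by omega
      rw [h0]
      simpa using hr.1
  · intro n i'
    have hcnt : pvCnt fixed (E ++ [(name, i, p)]) n i'
        = pvCnt fixed E n i'
          + (if pvPredE fixed n i' (name, i, p) then 1 else 0) := by
      simp only [pvCnt, List.countP_append, List.countP_cons, List.countP_nil]
      push_cast
      ring
    rw [hcnt, hsatE]
    cases hsp : pvSatE fixed (name, i, p) with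
    | false =>
      have hpred : pvPredE fixed n i' (name, i, p) = false := by
        simp [pvPredE, hsp]
      simp only [Bool.false_eq_true, if_false, hpred]
      rw [hsat n i']
      ring
    | true =>
      simp only [if_true]
      by_cases hni : (n, i') = ((name, i) : String × Int)
      · have hn' : n = name := congrArg Prod.fst hni
        have hi' : i' = i := congrArg Prod.snd hni
        rw [hn', hi', PySem.Dict.getD_insert_self, hsat name i]
        have hpred : pvPredE fixed name i (name, i, p) = true := by
          simp [pvPredE, hsp]
        rw [hpred]
        simp
      · rw [PySem.Dict.getD_insert, if_neg hni, hsat n i']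
        have hpred : pvPredE fixed n i' (name, i, p) = false := by
          by_cases hna : n = name
          · have hii : ¬ i' = i := fun hii => hni (by rw [hna, hii])
            simp [pvPredE, beq_eq_false_iff_ne.mpr (fun he => hii he.symm)]
          · simp [pvPredE, beq_eq_false_iff_ne.mpr (fun he => hna he.symm)]
        rw [hpred]
        simp
  · intro k hk
    show ((pvItemsOfP p).foldl (pvAddLit fixed idx.names.length) (0, false, idx.occ)).2.2.getD k []
        = pvOccFrom k 0 (E ++ [(name, i, p)])
    rw [f3 k, hocc k hk, pvOccFrom_append k E [(name, i, p)] 0]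
    congr 1
    cases hlk : (pvItemsOfP p).lookup k with
    | none => simp [pvOccFrom, hlk]
    | some v => simp [pvOccFrom, hlk, hk, hjl]

theorem pvImpFold (fixed : PySem.Dict String Int) (name : String) (i : Int) :
    ∀ (ps : List (List (String × Int))) (E : List PvEnt) (idx : PvIdx),
    PvInvE E fixed idx →
    PvInvE (E ++ ps.map (fun p => (name, i, p))) fixed
      (ps.foldl (pvAddImp fixed name i) idx) := by
  intro ps
  induction ps with
  | nil => intro E idx hI; simpa using hI
  | cons p ps ih =>
    intro E idx hI
    have h1 := pvAddImp_inv fixed name i p E idx hI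
    have h2 := ih (E ++ [(name, i, p)]) (pvAddImp fixed name i idx p) h1
    rw [List.foldl_cons]
    rw [List.map_cons, List.append_cons]
    exact h2

theorem pvAddSide_inv (fixed : PySem.Dict String Int) (name : String)
    (rules : List (List (List (String × Int)))) (i : Int) (E : List PvEnt) (idx : PvIdx)
    (hI : PvInvE E fixed idx) (hfresh : ∀ t ∈ E, ¬(t.1 = name ∧ t.2.1 = i)) :
    PvInvE (E ++ (PySem.List.pyGetD rules i []).map (fun p => (name, i, p))) fixed
      (pvAddSide fixed name rules idx i) := by
  have hzero : PvInvE E fixed { idx with sat := idx.sat.insert (name, i) 0 } := by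
    obtain ⟨hn, hs, hrl, hdl, hde, hre, hsat, hocc⟩ := hI
    refine ⟨hn, hs, hrl, hdl, hde, hre, ?_, hocc⟩
    intro n i'
    show (idx.sat.insert (name, i) 0).getD (n, i') 0 = pvCnt fixed E n i'
    by_cases hni : (n, i') = ((name, i) : String × Int)
    · have hn' : n = name := congrArg Prod.fst hni
      have hi' : i' = i := congrArg Prod.snd hni
      rw [hn', hi', PySem.Dict.getD_insert_self]
      have : pvCnt fixed E name i = 0 := by
        simp only [pvCnt, Int.natCast_eq_zero]
        rw [List.countP_eq_zero]
        intro t ht hp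
        simp only [pvPredE, Bool.and_eq_true, beq_iff_eq] at hp
        exact hfresh t ht ⟨hp.1.1, hp.1.2⟩
      rw [this]
    · rw [PySem.Dict.getD_insert, if_neg hni, hsat n i']
  exact pvImpFold fixed name i (PySem.List.pyGetD rules i []) E _ hzero

theorem pvImpsItem_fst {t : PvEnt} {kv : PvItem} (h : t ∈ pvImpsItem kv) : t.1 = kv.1 := by
  simp only [pvImpsItem, List.mem_flatMap, List.mem_map] at h
  obtain ⟨i', _, p, _, hp⟩ := h
  rw [← hp]

theorem pvItemsFold (fixed : PySem.Dict String Int) :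
    ∀ (its : List PvItem) (E : List PvEnt) (idx : PvIdx),
    PvInvE E fixed idx → (∀ t ∈ E, t.1 ∉ its.map Prod.fst) → (its.map Prod.fst).Nodup →
    PvInvE (E ++ pvImpsOf its) fixed
      (its.foldl (fun s kv => ([0, 1] : List Int).foldl (pvAddSide fixed kv.1 kv.2) s) idx) := by
  intro its
  induction its with
  | nil => intro E idx hI _ _; simpa [pvImpsOf] using hI
  | cons kv its ih =>
    intro E idx hI hE hnd
    have hnd2 := hnd
    rw [List.map_cons] at hnd2
    have hkn : kv.1 ∉ its.map Prod.fst := (List.nodup_cons.mp hnd2).1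
    have hnd' : (its.map Prod.fst).Nodup := (List.nodup_cons.mp hnd2).2
    have hfresh0 : ∀ t ∈ E, ¬(t.1 = kv.1 ∧ t.2.1 = (0 : Int)) := by
      intro t ht hc
      exact hE t ht (hc.1 ▸ List.mem_cons_self)
    have h0 := pvAddSide_inv fixed kv.1 kv.2 0 E idx hI hfresh0
    have hfresh1 : ∀ t ∈ E ++ (PySem.List.pyGetD kv.2 0 []).map (fun p => (kv.1, (0 : Int), p)),
        ¬(t.1 = kv.1 ∧ t.2.1 = (1 : Int)) := by
      intro t ht hc
      rcases List.mem_append.mp ht with h | h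
      · exact hE t h (hc.1 ▸ List.mem_cons_self)
      · obtain ⟨p, _, hp⟩ := List.mem_map.mp h
        rw [← hp] at hc
        exact absurd hc.2 (by norm_num)
    have h1 := pvAddSide_inv fixed kv.1 kv.2 1 _ _ h0 hfresh1
    have hE2eq : E ++ (PySem.List.pyGetD kv.2 0 []).map (fun p => (kv.1, (0 : Int), p))
        ++ (PySem.List.pyGetD kv.2 1 []).map (fun p => (kv.1, (1 : Int), p))
        = E ++ pvImpsItem kv := by
      rw [List.append_assoc]
      congr 1
      simp [pvImpsItem]
    rw [hE2eq] at h1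
    have hE' : ∀ t ∈ E ++ pvImpsItem kv, t.1 ∉ its.map Prod.fst := by
      intro t ht
      rcases List.mem_append.mp ht with h | h
      · intro hm; exact hE t h (List.mem_cons_of_mem _ hm)
      · rw [pvImpsItem_fst h]
        exact hkn
    have h2 := ih (E ++ pvImpsItem kv) _ h1 hE' hnd'
    rw [List.foldl_cons]
    have hinner : ([0, 1] : List Int).foldl (pvAddSide fixed kv.1 kv.2) idx
        = pvAddSide fixed kv.1 kv.2 (pvAddSide fixed kv.1 kv.2 idx 0) 1 := rfl
    have himps : pvImpsOf (kv :: its) = pvImpsItem kv ++ pvImpsOf its := by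
      simp [pvImpsOf]
    rw [himps, ← List.append_assoc]
    exact h2

theorem pvIdx0_inv (fixed : PySem.Dict String Int) : PvInvE [] fixed pvIdx0 := by
  refine ⟨rfl, rfl, rfl, rfl, ?_, ?_, ?_, ?_⟩
  · intro j h; simp at h
  · intro j h; simp at h
  · intro n i
    show PySem.Dict.empty.getD (n, i) 0 = pvCnt fixed [] n i
    rw [PySem.Dict.getD_empty]
    simp [pvCnt]
  · intro k _
    show PySem.Dict.empty.getD k [] = pvOccFrom k 0 []
    rw [PySem.Dict.getD_empty]
    rfl

theorem pvBuild_inv (fixed : PySem.Dict String Int) (items : List PvItem)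
    (hnd : (items.map Prod.fst).Nodup) :
    PvInvE (pvImpsOf items) fixed (pvBuild fixed items) := by
  have h := pvItemsFold fixed items [] pvIdx0 (pvIdx0_inv fixed) (by simp) hnd
  simpa [pvBuild] using h

theorem pvFstUnique {l : List PvItem} (hnd : (l.map Prod.fst).Nodup) {a b : PvItem}
    (ha : a ∈ l) (hb : b ∈ l) (hab : a.1 = b.1) : a = b := by
  induction l with
  | nil => cases ha
  | cons c l ih =>
    have hnd2 := hnd
    rw [List.map_cons] at hnd2
    have hkn : c.1 ∉ l.map Prod.fst := (List.nodup_cons.mp hnd2).1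
    have hnd' : (l.map Prod.fst).Nodup := (List.nodup_cons.mp hnd2).2
    rcases List.mem_cons.mp ha with rfl | ha' <;> rcases List.mem_cons.mp hb with h | hb'
    · rw [h]
    · exact absurd (hab ▸ List.mem_map_of_mem hb') hkn
    · rw [← h] at hkn
      exact absurd (hab ▸ List.mem_map_of_mem ha') hkn
    · exact ih hnd' ha' hb'

-- the decision 'sat[(name, i)] > 0' is exactly 'some implicant of rules[i] is satisfied'
theorem pvSat_pos_iff (items : List PvItem) (hnd : (items.map Prod.fst).Nodup)
    (name : String) (rules : List (List (List (String × Int))))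
    (hmem : (name, rules) ∈ items) (fixed : PySem.Dict String Int) (i : Int)
    (hi : i = 0 ∨ i = 1) :
    (0 < pvCnt fixed (pvImpsOf items) name i) ↔
      ((PySem.List.pyGetD rules i []).any (fun p => pvSettles fixed p) = true) := by
  have hcast : (0 < pvCnt fixed (pvImpsOf items) name i) ↔
      0 < (pvImpsOf items).countP (pvPredE fixed name i) := by
    simp [pvCnt]
  rw [hcast, List.countP_pos_iff, List.any_eq_true]
  constructor
  · rintro ⟨t, ht, hp⟩
    obtain ⟨kv, hkv, htkv⟩ := List.mem_flatMap.mp ht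
    have ht1 : t.1 = kv.1 := pvImpsItem_fst htkv
    simp only [pvPredE, Bool.and_eq_true, beq_iff_eq] at hp
    have hkveq : kv = (name, rules) :=
      pvFstUnique hnd hkv hmem (by rw [← ht1, hp.1.1])
    subst hkveq
    simp only [pvImpsItem, List.mem_flatMap, List.mem_map] at htkv
    obtain ⟨i', hi', p, hp', hteq⟩ := htkv
    refine ⟨p, ?_, ?_⟩
    · have : i' = i := by
        have h2 := hp.1.2
        rw [← hteq] at h2
        exact h2
      rw [← this]
      exact hp'
    · have := hp.2
      rw [← hteq] at this
      exact this
  · rintro ⟨p, hp, hsp⟩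
    refine ⟨(name, i, p), ?_, ?_⟩
    · apply List.mem_flatMap.mpr
      refine ⟨(name, rules), hmem, ?_⟩
      simp only [pvImpsItem, List.mem_flatMap, List.mem_map]
      refine ⟨i, ?_, p, hp, rfl⟩
      rcases hi with h | h <;> simp [h]
    · show pvPredE fixed name i (name, i, p) = true
      simp only [pvPredE, beq_self_eq_true, Bool.true_and]
      exact hsp

theorem pvStepCBody_eq (items : List PvItem) (hnd : (items.map Prod.fst).Nodup)
    (name : String) (rules : List (List (List (String × Int))))
    (hmem : (name, rules) ∈ items) (i : Int) (hi : i = 0 ∨ i = 1)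
    (s : PvSt) (idx : PvIdx) (b : Bool) (hI : PvInvE (pvImpsOf items) s.1 idx) :
    ∃ idx',
      pvStepCBody name ((s.1, s.2.1, s.2.2, idx), b) i =
        (((if (PySem.List.pyGetD rules i []).any (fun p => pvSettles s.1 p) then pvRecord name i s else s).1,
          (if (PySem.List.pyGetD rules i []).any (fun p => pvSettles s.1 p) then pvRecord name i s else s).2.1,
          (if (PySem.List.pyGetD rules i []).any (fun p => pvSettles s.1 p) then pvRecord name i s else s).2.2,
          idx'),
         b || (PySem.List.pyGetD rules i []).any (fun p => pvSettles s.1 p)) ∧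
      PvInvE (pvImpsOf items)
        (if (PySem.List.pyGetD rules i []).any (fun p => pvSettles s.1 p) then pvRecord name i s else s).1
        idx' := by
  have hcond : (0 < idx.sat.getD (name, i) 0) ↔
      ((PySem.List.pyGetD rules i []).any (fun p => pvSettles s.1 p) = true) := by
    rw [hI.sat_eq name i]
    exact pvSat_pos_iff items hnd name rules hmem s.1 i hi
  by_cases hh : (PySem.List.pyGetD rules i []).any (fun p => pvSettles s.1 p) = true
  · have hc : 0 < idx.sat.getD (name, i) 0 := hcond.mpr hh
    rw [hh]
    by_cases hcon : s.1.contains name = true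
    · by_cases hgd : (s.1.getD name 0 == i) = true
      · refine ⟨idx, ?_, ?_⟩
        · show pvStepCBody name ((s.1, s.2.1, s.2.2, idx), b) i = _
          unfold pvStepCBody
          rw [if_pos hc, if_pos hcon, if_pos hgd]
          rw [if_pos rfl]
          unfold pvRecord
          rw [if_pos hcon, if_pos hgd]
          simp
        · rw [if_pos rfl]
          unfold pvRecord
          rw [if_pos hcon, if_pos hgd]
          exact hI
      · refine ⟨idx, ?_, ?_⟩
        · show pvStepCBody name ((s.1, s.2.1, s.2.2, idx), b) i = _
          unfold pvStepCBody
          rw [if_pos hc, if_pos hcon, if_neg hgd]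
          rw [if_pos rfl]
          unfold pvRecord
          rw [if_pos hcon, if_neg hgd]
          simp
        · rw [if_pos rfl]
          unfold pvRecord
          rw [if_pos hcon, if_neg hgd]
          exact hI
    · have hcf : s.1.contains name = false := by
        cases h : s.1.contains name
        · rfl
        · exact absurd h hcon
      obtain ⟨hf1, hf2⟩ := pvFixC_inv (pvImpsOf items) name i s.1 idx hcf hI
      refine ⟨(pvFixC name i s.1 idx).2, ?_, ?_⟩
      · show pvStepCBody name ((s.1, s.2.1, s.2.2, idx), b) i = _
        unfold pvStepCBody
        rw [if_pos hc, if_neg (by rw [hcf]; exact Bool.false_ne_true)]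
        rw [if_pos rfl]
        unfold pvRecord
        rw [if_neg (by rw [hcf]; exact Bool.false_ne_true)]
        simp [hf1]
      · rw [if_pos rfl]
        unfold pvRecord
        rw [if_neg (by rw [hcf]; exact Bool.false_ne_true)]
        exact hf2
  · have hhf : (PySem.List.pyGetD rules i []).any (fun p => pvSettles s.1 p) = false := by
      cases h : (PySem.List.pyGetD rules i []).any (fun p => pvSettles s.1 p)
      · rfl
      · exact absurd h hh
    have hcf : ¬(0 < idx.sat.getD (name, i) 0) := fun hc => hh (hcond.mp hc)
    refine ⟨idx, ?_, ?_⟩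
    · show pvStepCBody name ((s.1, s.2.1, s.2.2, idx), b) i = _
      unfold pvStepCBody
      rw [if_neg hcf, hhf]
      rw [if_neg Bool.false_ne_true]
      simp
    · rw [hhf, if_neg Bool.false_ne_true]
      exact hI

theorem pvStepC_eq (items : List PvItem) (hnd : (items.map Prod.fst).Nodup)
    (name : String) (rules : List (List (List (String × Int))))
    (hmem : (name, rules) ∈ items) (s : PvSt) (idx : PvIdx)
    (hI : PvInvE (pvImpsOf items) s.1 idx) :
    ∃ idx',
      pvStepC name ((s.1, s.2.1, s.2.2, idx)) =
        (((pvStepB (name, rules) s).1.1, (pvStepB (name, rules) s).1.2.1,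
          (pvStepB (name, rules) s).1.2.2, idx'), (pvStepB (name, rules) s).2) ∧
      PvInvE (pvImpsOf items) (pvStepB (name, rules) s).1.1 idx' := by
  obtain ⟨idx1, h0, hI1⟩ := pvStepCBody_eq items hnd name rules hmem 0 (Or.inl rfl) s idx false hI
  set R0 := (if (PySem.List.pyGetD rules 0 []).any (fun p => pvSettles s.1 p)
      then pvRecord name 0 s else s) with hR0
  obtain ⟨idx2, h1, hI2⟩ := pvStepCBody_eq items hnd name rules hmem 1 (Or.inr rfl) R0 idx1
    (false || (PySem.List.pyGetD rules 0 []).any (fun p => pvSettles s.1 p)) hI1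
  set hit1 := (PySem.List.pyGetD rules 1 []).any (fun p => pvSettles R0.1 p) with hhit1
  set R1 := (if hit1 then pvRecord name 1 R0 else R0) with hR1
  have hB : pvStepB (name, rules) s =
      (R1, (PySem.List.pyGetD rules 0 []).any (fun p => pvSettles s.1 p) || hit1) := rfl
  refine ⟨idx2, ?_, ?_⟩
  · rw [hB]
    show ([0, 1] : List Int).foldl (pvStepCBody name) ((s.1, s.2.1, s.2.2, idx), false) = _
    rw [List.foldl_cons, List.foldl_cons, List.foldl_nil, h0, h1]
    rfl
  · rw [hB]
    exact hI2

theorem pvPassC_eq (items : List PvItem) (hnd : (items.map Prod.fst).Nodup) :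
    ∀ (mid : List PvItem) (s : PvSt) (idx : PvIdx) (accM : List PvItem) (prog : Bool),
    (∀ it ∈ mid, it ∈ items) → PvInvE (pvImpsOf items) s.1 idx →
    ∃ idx',
      pvPassC (mid.map Prod.fst) ((s.1, s.2.1, s.2.2, idx), accM.map Prod.fst, prog) =
        (((pvPassB mid (s, accM, prog)).1.1, (pvPassB mid (s, accM, prog)).1.2.1,
          (pvPassB mid (s, accM, prog)).1.2.2, idx'),
         (pvPassB mid (s, accM, prog)).2.1.map Prod.fst, (pvPassB mid (s, accM, prog)).2.2) ∧
      PvInvE (pvImpsOf items) (pvPassB mid (s, accM, prog)).1.1 idx' ∧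
      (∀ it ∈ (pvPassB mid (s, accM, prog)).2.1, it ∈ accM ∨ it ∈ items) := by
  intro mid
  induction mid with
  | nil =>
    intro s idx accM prog _ hI
    exact ⟨idx, rfl, hI, fun it h => Or.inl h⟩
  | cons it mid ih =>
    intro s idx accM prog hmems hI
    obtain ⟨nm, rl⟩ := it
    have hmem : (nm, rl) ∈ items := hmems _ List.mem_cons_self
    obtain ⟨idx1, hstep, hI1⟩ := pvStepC_eq items hnd nm rl hmem s idx hI
    have hCunf : pvPassC (((nm, rl) :: mid).map Prod.fst)
        ((s.1, s.2.1, s.2.2, idx), accM.map Prod.fst, prog)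
        = (if (pvStepC nm (s.1, s.2.1, s.2.2, idx)).2
            then pvPassC (mid.map Prod.fst)
              ((pvStepC nm (s.1, s.2.1, s.2.2, idx)).1, accM.map Prod.fst, true)
            else pvPassC (mid.map Prod.fst)
              ((pvStepC nm (s.1, s.2.1, s.2.2, idx)).1, accM.map Prod.fst ++ [nm], prog)) := rfl
    have hBunf : pvPassB ((nm, rl) :: mid) (s, accM, prog)
        = (if (pvStepB (nm, rl) s).2
            then pvPassB mid ((pvStepB (nm, rl) s).1, accM, true)
            else pvPassB mid ((pvStepB (nm, rl) s).1, accM ++ [(nm, rl)], prog)) := rfl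
    cases hr2 : (pvStepB (nm, rl) s).2 with
    | true =>
      obtain ⟨idx2, hpass, hI2, hmem2⟩ :=
        ih (pvStepB (nm, rl) s).1 idx1 accM true
          (fun x hx => hmems x (List.mem_cons_of_mem _ hx)) hI1
      refine ⟨idx2, ?_, ?_, ?_⟩
      · rw [hCunf, hstep, hr2, if_pos rfl, hBunf, hr2, if_pos rfl]
        exact hpass
      · rw [hBunf, hr2, if_pos rfl]
        exact hI2
      · rw [hBunf, hr2, if_pos rfl]
        exact hmem2
    | false =>
      obtain ⟨idx2, hpass, hI2, hmem2⟩ :=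
        ih (pvStepB (nm, rl) s).1 idx1 (accM ++ [(nm, rl)]) prog
          (fun x hx => hmems x (List.mem_cons_of_mem _ hx)) hI1
      refine ⟨idx2, ?_, ?_, ?_⟩
      · rw [hCunf, hstep, hr2, if_neg Bool.false_ne_true, hBunf, hr2,
          if_neg Bool.false_ne_true]
        rw [show accM.map Prod.fst ++ [nm] = (accM ++ [(nm, rl)]).map Prod.fst by simp]
        exact hpass
      · rw [hBunf, hr2, if_neg Bool.false_ne_true]
        exact hI2
      · rw [hBunf, hr2, if_neg Bool.false_ne_true]
        intro x hx
        rcases hmem2 x hx with h | h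
        · rcases List.mem_append.mp h with h2 | h2
          · exact Or.inl h2
          · have : x = (nm, rl) := by simpa using h2
            exact Or.inr (this ▸ hmem)
        · exact Or.inr h

theorem pvLoopC_eq (items : List PvItem) (hnd : (items.map Prod.fst).Nodup) :
    ∀ (n : Nat) (mid : List PvItem) (s : PvSt) (idx : PvIdx),
    mid.length ≤ n → (∀ it ∈ mid, it ∈ items) → PvInvE (pvImpsOf items) s.1 idx →
    pvLoopC (s.1, s.2.1, s.2.2, idx) (mid.map Prod.fst) = pvSettle s mid := by
  intro n
  induction n with
  | zero =>
    intro mid s idx hlen _ _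
    have hmid : mid = [] := List.eq_nil_of_length_eq_zero (Nat.le_zero.mp hlen)
    subst hmid
    rw [pvSettle, dif_pos rfl, pvLoopC]
    simp [pvPassC]
  | succ n ih =>
    intro mid s idx hlen hmems hI
    by_cases hmid : mid = []
    · subst hmid
      rw [pvSettle, dif_pos rfl, pvLoopC]
      simp [pvPassC]
    · obtain ⟨idx', hpass, hI', hmem'⟩ := pvPassC_eq items hnd mid s idx [] false hmems hI
      rw [List.map_nil] at hpass
      rw [pvSettle, dif_neg hmid, pvLoopC, hpass]
      by_cases hP : (pvPassB mid (s, [], false)).2.2 = true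
      · rw [dif_pos hP]
        by_cases hnil : (pvPassB mid (s, [], false)).2.1 = []
        · rw [dif_neg (by
            rw [hnil]
            simp)]
          rw [hnil, pvSettle, dif_pos rfl]
        · rw [dif_pos ⟨hP, by
            intro hc
            exact hnil (List.map_eq_nil_iff.mp hc)⟩]
          have hlt := pvPassB_progress_lt mid (s, [], false) rfl hP
          simp only [List.length_nil, Nat.zero_add] at hlt
          exact ih (pvPassB mid (s, [], false)).2.1 (pvPassB mid (s, [], false)).1 idx'
            (by omega)
            (fun x hx => (hmem' x hx).resolve_left (by simp)) hI'
      · have hPf : (pvPassB mid (s, [], false)).2.2 = false := by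
          cases h : (pvPassB mid (s, [], false)).2.2
          · rfl
          · exact absurd h hP
        rw [dif_neg hP, dif_neg (by
          intro hc
          rw [hPf] at hc
          exact Bool.false_ne_true hc.1)]

-- ===== VERDICT (by name: the statement is the Claim_ definition above) =====
theorem logical_domain_of_influence_spec : Claim_equal_logical_domain_of_influence := by
  intro state primes _ _
  unfold Spec_logical_domain_of_influence logical_domain_of_influence logical_domain_of_influence_alt
  have hnd := PySem.Dict.nodup_keys_ofList primes
  have hndi : (((PySem.Dict.ofList primes).items.map Prod.fst)).Nodup := by
    simpa [PySem.Dict.keys] using hnd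
  have hA := pvLoopA_eq_pvSettle (PySem.Dict.ofList primes).items.length (PySem.Dict.ofList primes)
    (PySem.Dict.ofList state, PySem.Dict.empty, PySem.Dict.empty) le_rfl hnd
  have hB := pvLoopC_eq (PySem.Dict.ofList primes).items hndi
    (PySem.Dict.ofList primes).items.length (PySem.Dict.ofList primes).items
    (PySem.Dict.ofList state, PySem.Dict.empty, PySem.Dict.empty)
    (pvBuild (PySem.Dict.ofList state) (PySem.Dict.ofList primes).items)
    le_rfl (fun _ h => h)
    (pvBuild_inv (PySem.Dict.ofList state) (PySem.Dict.ofList primes).items hndi)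
  have hkeys : (PySem.Dict.ofList primes).keys = (PySem.Dict.ofList primes).items.map Prod.fst := rfl
  simp only [PySem.Dict.size]
  rw [hA, hkeys, hB]
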